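-- pv_equiv track=rewrite | github.com/zuquan-song/leetcode | python/tiktok/miniCharactertransformation.py | mini_char_transfer
-- ===== SOURCE A (Python) =====
-- class UnionFind:
--     def __init__(self, n):
--         self.parent = [i for i in range(n)]
--
--     def find(self, i):
--         if i != self.parent[i]:
--             self.parent[i] = self.find(self.parent[i])
--         return self.parent[i]
--
--     def union(self, a, b):
--         ra, rb = self.find(a), self.find(b)
--         if ra != rb:
--             self.parent[ra] = self.parent[rb]
--
-- def mini_char_transfer(source, target):
--     def unions(ch, d, visited):
--         if ch not in d or ch in visited:
--             return
--         visited.add(ch)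
--         uf.union(ord(ch), ord(d[ch]))
--         unions(d[ch], d, visited)
--
--     def hasLoop(ch, d, visited):
--         if ch in visited:
--             return True
--         if ch not in d:
--             return False
--         visited.add(ch)
--         return hasLoop(d[ch], d, visited)
--
--     d = {}
--     res = 0
--     for i, ch in enumerate(source):
--         if target[i] != ch and ch not in d:
--             d[ch] = target[i]
--             res += 1
--         elif ch in d and d[ch] != target[i]:
--             return -1
--     uf = UnionFind(128)
--     for key in d.keys():
--         unions(key, d, set())
--
--     key_set = set(d.keys())
--     groups = set()
--     for i in range(128):
--         if chr(i) in key_set: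
--             groups.add(uf.find(i))
--     loop = 0
--     for i in groups:
--         if hasLoop(chr(i), d, set()):
--             loop += 1
--
--     return res + loop
-- ===== SOURCE B (Python) =====
-- def mini_char_transfer(source, target):
--     d = {}
--     res = 0
--     for i, ch in enumerate(source):
--         t = target[i]
--         if t != ch and ch not in d:
--             d[ch] = t
--             res += 1
--         elif ch in d and d[ch] != t:
--             return -1
--     n = len(d)
--
--     def cycle_of(ch):
--         # nodes of ch's cycle (starting at ch), or None if ch is not on a cycle
--         cur, seen = ch, []
--         for _ in range(n):
--             seen.append(cur)
--             cur = d.get(cur)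
--             if cur is None:
--                 return None
--             if cur == ch:
--                 return seen
--         return None
--
--     loops = 0
--     for ch in d:
--         cyc = cycle_of(ch)
--         if cyc is not None and ch == min(cyc):
--             loops += 1
--     return res + loops
-- ===== Notes on version B (the rewrite author's own statement) =====
-- stated objective: simpler
-- what changed: Replaces the UnionFind class plus the unions/hasLoop recursions and per-group root scan by a direct per-key cycle walk: a key contributes 1 exactly when it lies on a cycle of the mapping and is that cycle's minimum character, which counts each cyclic component once without any union-find structure.
-- outside the precondition, e.g. on mini_char_transfer('aab', 'bc'): A returns -1, B returns -1
import Mathlib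
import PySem

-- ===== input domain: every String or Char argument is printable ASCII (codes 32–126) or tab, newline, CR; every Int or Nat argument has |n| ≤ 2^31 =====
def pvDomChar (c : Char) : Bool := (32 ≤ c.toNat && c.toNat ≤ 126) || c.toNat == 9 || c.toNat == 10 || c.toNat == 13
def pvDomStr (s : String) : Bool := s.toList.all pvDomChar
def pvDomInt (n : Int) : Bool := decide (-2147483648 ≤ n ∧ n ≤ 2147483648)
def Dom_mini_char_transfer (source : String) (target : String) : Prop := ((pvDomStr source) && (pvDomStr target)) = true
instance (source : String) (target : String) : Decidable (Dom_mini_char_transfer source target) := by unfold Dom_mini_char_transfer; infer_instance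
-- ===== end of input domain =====

-- B replaces A's UnionFind + unions/hasLoop group scan by a direct per-key cycle walk
-- (count a key iff it is the minimum of a cycle of the mapping); same result, no union-find.

-- ===== PORT A =====

-- the state of the mapping-building loop shared by both Pythons: either still running
-- (current dict and res), an early `return -1`, or an IndexError on target[i]
-- (Python raises there: outside the claim, both ports map it to the same sentinel result 0)
inductive PvSt where
  | run : PySem.Dict Char Char → Int → PvSt
  | ret : Int → PvSt
  | err : PvSt
deriving Repr, DecidableEq

-- one iteration of `for i, ch in enumerate(source)` in A
def pvStepA (tcs : List Char) (st : PvSt) (ic : Int × Char) : PvSt :=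
  match st with
  | .run d res =>
      match PySem.List.pyGet? tcs ic.1 with
      | none => .err
      | some t =>
          if t ≠ ic.2 ∧ ¬ d.contains ic.2 then .run (d.insert ic.2 t) (res + 1)
          else if d.contains ic.2 ∧ d.get? ic.2 ≠ some t then .ret (-1)
          else .run d res
  | s => s

def pvBuildA (scs tcs : List Char) : PvSt :=
  (PySem.List.enumerate scs 0).foldl (pvStepA tcs) (.run PySem.Dict.empty 0)

-- self.parent[i] ; in range under Dom (out of range Python raises: outside the claim)
def pvGetP (p : List Int) (i : Int) : Int := (PySem.List.pyGet? p i).getD 0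
-- self.parent[i] = v
def pvSetP (p : List Int) (i : Int) (v : Int) : List Int := PySem.List.pySetD p i v

-- UnionFind.find with path compression; fuel only makes the recursion structural
-- (parent chains in a 128-forest have depth < 128, so fuel 128 is never exhausted on Dom)
def pvFind : Nat → List Int → Int → Int × List Int
  | 0, p, i => (i, p)
  | fuel + 1, p, i =>
      let pi := pvGetP p i
      if i ≠ pi then
        let rp := pvFind fuel p pi
        let p' := pvSetP rp.2 i rp.1
        (pvGetP p' i, p')
      else (pvGetP p i, p)

-- UnionFind.union
def pvUnion (p : List Int) (a b : Int) : List Int :=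
  let r1 := pvFind 128 p a
  let r2 := pvFind 128 r1.2 b
  if r1.1 ≠ r2.1 then pvSetP r2.2 r1.1 (pvGetP r2.2 r2.1) else r2.2

-- A's `unions` helper (fuel: the visited set grows by one key per call, so
-- len(d)+1 calls suffice; the guard is never hit)
def pvUnions : Nat → PySem.Dict Char Char → Char → PySem.Set Char → List Int → PySem.Set Char × List Int
  | 0, _, _, vis, p => (vis, p)
  | fuel + 1, d, ch, vis, p =>
      match d.get? ch with
      | none => (vis, p)
      | some t =>
          if vis.contains ch then (vis, p)
          else pvUnions fuel d t (PySem.Set.add vis ch) (pvUnion p (ch.toNat : Int) (t.toNat : Int))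

-- A's `hasLoop` helper (same fuel bound as unions)
def pvHasLoop : Nat → PySem.Dict Char Char → Char → PySem.Set Char → Bool
  | 0, _, _, _ => false
  | fuel + 1, d, ch, vis =>
      if vis.contains ch then true
      else
        match d.get? ch with
        | none => false
        | some t => pvHasLoop fuel d t (PySem.Set.add vis ch)

def mini_char_transfer (source : String) (target : String) : Int :=
  match pvBuildA source.toList target.toList with
  | .err => 0
  | .ret v => v
  | .run d res =>
      -- uf = UnionFind(128): parent = [i for i in range(128)]
      let p0 : List Int := PySem.List.pyRange 0 128 1
      -- for key in d.keys(): unions(key, d, set())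
      let p1 : List Int :=
        d.keys.foldl (fun p k => (pvUnions (d.keys.length + 1) d k PySem.Set.empty p).2) p0
      let keySet : PySem.Set Char := PySem.Set.ofList d.keys
      -- for i in range(128): if chr(i) in key_set: groups.add(uf.find(i))
      let gp : PySem.Set Int × List Int :=
        (PySem.List.pyRange 0 128 1).foldl
          (fun gp i =>
            if keySet.contains (Char.ofNat i.toNat) then
              let fr := pvFind 128 gp.2 i
              (PySem.Set.add gp.1 fr.1, fr.2)
            else gp)
          (PySem.Set.empty, p1)
      -- for i in groups: if hasLoop(chr(i), d, set()): loop += 1   (order-independent: a count)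
      let loop : Int :=
        gp.1.foldl
          (fun acc i =>
            if pvHasLoop (d.keys.length + 1) d (Char.ofNat i.toNat) PySem.Set.empty then acc + 1
            else acc)
          0
      res + loop

-- ===== PORT B =====

-- B's mapping-building loop (textually the same loop as in A's source)
def pvStepB (tcs : List Char) (st : PvSt) (ic : Int × Char) : PvSt :=
  match st with
  | .run d res =>
      match PySem.List.pyGet? tcs ic.1 with
      | none => .err
      | some t =>
          if t ≠ ic.2 ∧ ¬ d.contains ic.2 then .run (d.insert ic.2 t) (res + 1)
          else if d.contains ic.2 ∧ d.get? ic.2 ≠ some t then .ret (-1)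
          else .run d res
  | s => s

def pvBuildB (scs tcs : List Char) : PvSt :=
  (PySem.List.enumerate scs 0).foldl (pvStepB tcs) (.run PySem.Dict.empty 0)

-- the `for _ in range(n)` loop inside cycle_of (fuel IS the Python loop bound n)
def pvCycGo : Nat → PySem.Dict Char Char → Char → Char → List Char → Option (List Char)
  | 0, _, _, _, _ => none
  | fuel + 1, d, ch, cur, seen =>
      let seen' := seen ++ [cur]
      match d.get? cur with
      | none => none
      | some nxt => if nxt = ch then some seen' else pvCycGo fuel d ch nxt seen'

def pvCycleOf (d : PySem.Dict Char Char) (ch : Char) : Option (List Char) :=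
  pvCycGo d.keys.length d ch ch []

def mini_char_transfer_alt (source : String) (target : String) : Int :=
  match pvBuildB source.toList target.toList with
  | .err => 0
  | .ret v => v
  | .run d res =>
      let loops : Int :=
        d.keys.foldl
          (fun acc ch =>
            match pvCycleOf d ch with
            | some cyc => if ch = (PySem.List.min? cyc (fun x => x)).getD ch then acc + 1 else acc
            | none => acc)
          0
      res + loops

-- ===== PRECONDITION & SPEC =====

-- Pre_ excludes source longer than target, where A raises IndexError on target[i] —
-- except that when a mapping conflict occurs before the overrun index both programs
-- still return -1 there (they behave identically on every excluded input that returns).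
def Pre_mini_char_transfer (source : String) (target : String) : Prop :=
  source.toList.length ≤ target.toList.length
instance (source : String) (target : String) : Decidable (Pre_mini_char_transfer source target) := by
  unfold Pre_mini_char_transfer; infer_instance

def pvWitness_mini_char_transfer : String × String := ("ab", "ba")

def Spec_mini_char_transfer (source : String) (target : String) (out : Int) : Prop :=
  out = mini_char_transfer_alt source target
instance (source : String) (target : String) (out : Int) : Decidable (Spec_mini_char_transfer source target out) := by
  unfold Spec_mini_char_transfer; infer_instance

-- ===== CLAIM (what is proved, stated in full; the proofs are below) =====
def Claim_equal_mini_char_transfer : Prop := ∀ (source : String) (target : String), Dom_mini_char_transfer source target → Pre_mini_char_transfer source target → Spec_mini_char_transfer source target (mini_char_transfer source target)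

-- ===== LEMMAS AND PROOFS =====

theorem pv_witness_ok :
    Dom_mini_char_transfer pvWitness_mini_char_transfer.1 pvWitness_mini_char_transfer.2 ∧
    Pre_mini_char_transfer pvWitness_mini_char_transfer.1 pvWitness_mini_char_transfer.2 := by
  constructor <;> decide

-- ---------- phase 1: the two building loops are literally the same function ----------

theorem pvBuild_eq : pvBuildB = pvBuildA := rfl

-- the dict built under Dom has distinct keys and all codes < 128
def PvGood (d : PySem.Dict Char Char) : Prop :=
  d.keys.Nodup ∧ ∀ pr ∈ d.items, pr.1.toNat < 128 ∧ pr.2.toNat < 128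

theorem pv_dom_char {c : Char} (h : pvDomChar c = true) : c.toNat < 128 := by
  simp [pvDomChar] at h; omega

theorem pv_build_good (scs tcs : List Char)
    (hs : ∀ c ∈ scs, pvDomChar c = true) (ht : ∀ c ∈ tcs, pvDomChar c = true)
    {d : PySem.Dict Char Char} {res : Int} (h : pvBuildA scs tcs = .run d res) : PvGood d := by
  have main : ∀ (l : List (Int × Char)) (st : PvSt),
      (∀ p ∈ l, p.2 ∈ scs) →
      (match st with | .run d0 _ => PvGood d0 | _ => True) →
      (match l.foldl (pvStepA tcs) st with | .run d0 _ => PvGood d0 | _ => True) := by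
    intro l
    induction l with
    | nil => intro st _ hst; exact hst
    | cons a l ih =>
        intro st hmem hst
        apply ih _ (fun p hp => hmem p (List.mem_cons_of_mem a hp))
        cases st with
        | ret v => exact hst
        | err => exact hst
        | run d0 res0 =>
            simp only [pvStepA]
            cases hget : PySem.List.pyGet? tcs a.1 with
            | none => trivial
            | some t =>
                dsimp only
                by_cases h1 : t ≠ a.2 ∧ ¬ d0.contains a.2
                · rw [if_pos h1]
                  refine ⟨PySem.Dict.nodup_keys_insert d0 a.2 t hst.1, ?_⟩
                  intro pr hpr
                  rcases (PySem.Dict.mem_items_insert d0 a.2 t pr).mp hpr with hpr | hpr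
                  · subst hpr
                    constructor
                    · exact pv_dom_char (hs a.2 (hmem a (List.mem_cons_self) ))
                    · exact pv_dom_char (ht t (PySem.List.mem_of_pyGet?_eq_some tcs hget))
                  · exact hst.2 pr hpr.1
                · rw [if_neg h1]
                  by_cases h2 : d0.contains a.2 ∧ d0.get? a.2 ≠ some t
                  · rw [if_pos h2]; trivial
                  · rw [if_neg h2]; exact hst
  have h0 : (∀ p ∈ PySem.List.enumerate scs 0, p.2 ∈ scs) := by
    intro p hp
    obtain ⟨k, hk, hpk⟩ := (PySem.List.mem_enumerate_iff scs 0 p).mp hp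
    rw [hpk]
    exact List.getElem_mem hk
  have hgood0 : PvGood PySem.Dict.empty := by
    constructor
    · simp [pysem]
    · intro pr hpr
      simp [PySem.Dict.empty] at hpr
  have := main (PySem.List.enumerate scs 0) (.run PySem.Dict.empty 0) h0 hgood0
  unfold pvBuildA at h
  rw [h] at this
  exact this

-- ---------- ideal functional-graph theory on Char ----------

def pvIter (d : PySem.Dict Char Char) : Nat → Char → Option Char
  | 0, x => some x
  | k + 1, x => (d.get? x).bind (pvIter d k)

def pvLoops (d : PySem.Dict Char Char) (x : Char) : Prop := ∀ k, (pvIter d k x).isSome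

def pvOnCyc (d : PySem.Dict Char Char) (y : Char) : Prop := ∃ k, 0 < k ∧ pvIter d k y = some y

def pvOrb (d : PySem.Dict Char Char) (y : Char) : List Char :=
  (List.range (d.keys.length + 1)).filterMap (fun k => pvIter d k y)

def pvTermF (d : PySem.Dict Char Char) : Nat → Char → Char
  | 0, x => x
  | k + 1, x => match d.get? x with
    | none => x
    | some y => pvTermF d k y

def pvMinC (d : PySem.Dict Char Char) (y : Char) : Char :=
  (PySem.List.min? (pvOrb d y) (fun x => x)).getD y

def pvTerm (d : PySem.Dict Char Char) (x : Char) : Char :=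
  match pvIter d (d.keys.length + 1) x with
  | some y => pvMinC d y
  | none => pvTermF d (d.keys.length + 1) x

def pvER (d : PySem.Dict Char Char) (x y : Char) : Prop :=
  Relation.EqvGen (fun a b => d.get? a = some b) x y

theorem pv_iter_add (d : PySem.Dict Char Char) (a b : Nat) (x : Char) :
    pvIter d (a + b) x = (pvIter d a x).bind (pvIter d b) := by
  induction a generalizing x with
  | zero => simp [pvIter]
  | succ a ih =>
      have : a + 1 + b = (a + b) + 1 := by omega
      rw [this]
      show (d.get? x).bind (pvIter d (a + b)) = _
      cases h : d.get? x with
      | none => simp [pvIter, h]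
      | some y => simp [pvIter, h, ih]

theorem pv_iter_mono (d : PySem.Dict Char Char) {a b : Nat} {x : Char} (hab : a ≤ b)
    (h : (pvIter d b x).isSome) : (pvIter d a x).isSome := by
  have hb : b = a + (b - a) := by omega
  rw [hb, pv_iter_add] at h
  cases hx : pvIter d a x with
  | none => rw [hx] at h; simp at h
  | some y => simp

theorem pv_mem_keys_of_get? {d : PySem.Dict Char Char} {x y : Char} (h : d.get? x = some y) :
    x ∈ d.keys := by
  by_contra hx
  rw [(PySem.Dict.get?_eq_none_iff_not_mem_keys d x).mpr hx] at h
  simp at h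

theorem pv_repeat_loops {d : PySem.Dict Char Char} {a b : Nat} {x : Char} {v : Char}
    (ha : pvIter d a x = some v) (hb : pvIter d b x = some v) (hab : a < b) : pvLoops d x := by
  intro k
  induction k using Nat.strong_induction_on with
  | _ k ih =>
    by_cases hk : k ≤ b
    · exact pv_iter_mono d hk (by simp [hb])
    · have hk' : k = b + (k - b) := by omega
      have h1 : pvIter d k x = pvIter d (a + (k - b)) x := by
        conv_lhs => rw [hk']
        rw [pv_iter_add, pv_iter_add, ha, hb]
      rw [h1]
      exact ih (a + (k - b)) (by omega)

theorem pv_pigeon {d : PySem.Dict Char Char} (hnd : d.keys.Nodup) {x : Char}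
    (h : (pvIter d (d.keys.length + 1) x).isSome) : pvLoops d x := by
  classical
  have hdef : ∀ j, j ≤ d.keys.length → ∃ v, pvIter d j x = some v ∧ v ∈ d.keys := by
    intro j hj
    have h1 : (pvIter d j x).isSome := pv_iter_mono d (by omega) h
    obtain ⟨v, hv⟩ := Option.isSome_iff_exists.mp h1
    refine ⟨v, hv, ?_⟩
    have h2 : (pvIter d (j + 1) x).isSome := pv_iter_mono d (by omega) h
    rw [pv_iter_add, hv] at h2
    simp only [Option.bind_some] at h2
    cases hgv : d.get? v with
    | none => simp [pvIter, hgv] at h2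
    | some w => exact pv_mem_keys_of_get? hgv
  have hcard : (d.keys.toFinset).card < (Finset.range (d.keys.length + 1)).card := by
    rw [List.toFinset_card_of_nodup hnd, Finset.card_range]; omega
  have hmap : Set.MapsTo (fun j => (pvIter d j x).iget) ↑(Finset.range (d.keys.length + 1))
      ↑(d.keys.toFinset) := by
    intro j hj
    simp only [Finset.coe_range, Set.mem_Iio] at hj
    obtain ⟨v, hv, hvk⟩ := hdef j (by omega)
    simp [hv, hvk]
  obtain ⟨a, ha, b, hb, hne, heq⟩ := Finset.exists_ne_map_eq_of_card_lt_of_maps_to hcard hmap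
  simp only [Finset.mem_range] at ha hb
  obtain ⟨va, hva, -⟩ := hdef a (by omega)
  obtain ⟨vb, hvb, -⟩ := hdef b (by omega)
  have hvab : va = vb := by simpa [hva, hvb] using heq
  rcases Nat.lt_or_ge a b with hab | hab
  · exact pv_repeat_loops hva (hvab ▸ hvb) hab
  · have hba : b < a := by omega
    exact pv_repeat_loops hvb (hvab ▸ hva) hba

theorem pv_loops_iff {d : PySem.Dict Char Char} (hnd : d.keys.Nodup) (x : Char) :
    pvLoops d x ↔ (pvIter d (d.keys.length + 1) x).isSome := by
  exact ⟨fun h => h _, pv_pigeon hnd⟩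

theorem pv_exit {d : PySem.Dict Char Char} (hnd : d.keys.Nodup) {x : Char} (h : ¬ pvLoops d x) :
    ∃ e ≤ d.keys.length, ∃ w, pvIter d e x = some w ∧ d.get? w = none := by
  classical
  have hex : ∃ k, ¬ (pvIter d k x).isSome := by
    by_contra hc
    push Not at hc
    exact h (fun k => hc k)
  have he' : ¬ (pvIter d (Nat.find hex) x).isSome := Nat.find_spec hex
  set e' := Nat.find hex with he'def
  have he'pos : 0 < e' := by
    rcases Nat.eq_zero_or_pos e' with h0 | h0
    · exfalso; apply he'; rw [h0]; simp [pvIter]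
    · exact h0
  have hemin : (pvIter d (e' - 1) x).isSome := by
    by_contra hc
    have : e' ≤ e' - 1 := by rw [he'def]; exact Nat.find_le hc
    omega
  obtain ⟨w, hw⟩ := Option.isSome_iff_exists.mp hemin
  refine ⟨e' - 1, ?_, w, hw, ?_⟩
  · by_contra hgt
    have : (pvIter d (d.keys.length + 1) x).isSome := pv_iter_mono d (by omega) hemin
    exact h (pv_pigeon hnd this)
  · cases hgw : d.get? w with
    | none => rfl
    | some v =>
        exfalso; apply he'
        have h1 : e' = (e' - 1) + 1 := by omega
        rw [h1, pv_iter_add, hw]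
        simp [pvIter, hgw]

theorem pv_mem_orb {d : PySem.Dict Char Char} {y w : Char} :
    w ∈ pvOrb d y ↔ ∃ k ≤ d.keys.length, pvIter d k y = some w := by
  simp only [pvOrb, List.mem_filterMap, List.mem_range]
  constructor
  · rintro ⟨k, hk, hkw⟩; exact ⟨k, by omega, hkw⟩
  · rintro ⟨k, hk, hkw⟩; exact ⟨k, by omega, hkw⟩

theorem pv_cyc_loops {d : PySem.Dict Char Char} {y : Char} (h : pvOnCyc d y) : pvLoops d y := by
  obtain ⟨k, hk0, hky⟩ := h
  exact pv_repeat_loops (a := 0) (v := y) (by simp [pvIter]) hky hk0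

theorem pv_cyc_min_period {d : PySem.Dict Char Char} (hnd : d.keys.Nodup) {y : Char}
    (h : pvOnCyc d y) : ∃ P, 0 < P ∧ P ≤ d.keys.length ∧ pvIter d P y = some y ∧
      ∀ j, 0 < j → j < P → pvIter d j y ≠ some y := by
  classical
  have hex : ∃ k, 0 < k ∧ pvIter d k y = some y := h
  have hP : 0 < Nat.find hex ∧ pvIter d (Nat.find hex) y = some y := Nat.find_spec hex
  set P := Nat.find hex with hPdef
  have hmin : ∀ j, 0 < j → j < P → pvIter d j y ≠ some y := by
    intro j hj0 hjP hje
    have hle : P ≤ j := by rw [hPdef]; exact Nat.find_le ⟨hj0, hje⟩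
    omega
  refine ⟨P, hP.1, ?_, hP.2, hmin⟩
  by_contra hPn
  have hloops := pv_cyc_loops h
  have hdef : ∀ j : Nat, ∃ v, pvIter d j y = some v ∧ v ∈ d.keys := by
    intro j
    obtain ⟨v, hv⟩ := Option.isSome_iff_exists.mp (hloops j)
    refine ⟨v, hv, ?_⟩
    have h2 := hloops (j + 1)
    rw [pv_iter_add, hv] at h2
    simp only [Option.bind_some] at h2
    cases hgv : d.get? v with
    | none => simp [pvIter, hgv] at h2
    | some w => exact pv_mem_keys_of_get? hgv
  have key : ∀ a b : Nat, a < b → b < P → pvIter d a y = pvIter d b y → False := by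
    intro a b hab hbP hesame
    have hcyc : pvIter d (a + (P - b)) y = some y := by
      have h2 : pvIter d P y = some y := hP.2
      have h3 : P = b + (P - b) := by omega
      rw [h3, pv_iter_add] at h2
      rw [pv_iter_add, hesame]
      exact h2
    exact hmin (a + (P - b)) (by omega) (by omega) hcyc
  have hcard : (d.keys.toFinset).card < (Finset.range P).card := by
    rw [List.toFinset_card_of_nodup hnd, Finset.card_range]; omega
  have hmap : Set.MapsTo (fun j => (pvIter d j y).getD y) ↑(Finset.range P) ↑(d.keys.toFinset) := by
    intro j _
    obtain ⟨v, hv, hvk⟩ := hdef j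
    simp [hv, hvk]
  obtain ⟨a, ha, b, hb, hne, heq⟩ := Finset.exists_ne_map_eq_of_card_lt_of_maps_to hcard hmap
  simp only [Finset.mem_range] at ha hb
  obtain ⟨va, hva, -⟩ := hdef a
  obtain ⟨vb, hvb, -⟩ := hdef b
  have hvab : va = vb := by simpa [hva, hvb] using heq
  rcases Nat.lt_or_ge a b with hab | hab
  · exact key a b hab hb (by rw [hva, hvb, hvab])
  · have : b < a := by omega
    exact key b a this ha (by rw [hva, hvb, hvab])

theorem pv_cyc_reduce {d : PySem.Dict Char Char} (hnd : d.keys.Nodup) {y w : Char}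
    (h : pvOnCyc d y) {m : Nat} (hm : pvIter d m y = some w) :
    ∃ m' ≤ d.keys.length, pvIter d m' y = some w := by
  revert hm
  induction m using Nat.strong_induction_on with
  | _ m ih => ?_
  intro hm
  by_cases hm' : m ≤ d.keys.length
  · exact ⟨m, hm', hm⟩
  · obtain ⟨P, hP0, hPn, hPy, -⟩ := pv_cyc_min_period hnd h
    have hm2 : pvIter d (m - P) y = some w := by
      have h1 : m = P + (m - P) := by omega
      rw [h1, pv_iter_add, hPy] at hm
      simpa using hm
    exact ih (m - P) (by omega) hm2

theorem pv_cyc_step {d : PySem.Dict Char Char} (hnd : d.keys.Nodup) {y y' : Char}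
    (h : pvOnCyc d y) (hy : d.get? y = some y') :
    pvOnCyc d y' ∧ ∀ w, (w ∈ pvOrb d y' ↔ w ∈ pvOrb d y) := by
  obtain ⟨P, hP0, hPn, hPy, -⟩ := pv_cyc_min_period hnd h
  have hstep : ∀ k : Nat, pvIter d k y' = pvIter d (k + 1) y := by
    intro k
    have : k + 1 = 1 + k := by omega
    rw [this, pv_iter_add]
    simp [pvIter, hy]
  have hcyc' : pvOnCyc d y' := by
    refine ⟨P, hP0, ?_⟩
    rw [hstep P]
    have h1 : P + 1 = P + 1 := rfl
    rw [pv_iter_add, hPy]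
    simp [pvIter, hy]
  refine ⟨hcyc', fun w => ?_⟩
  rw [pv_mem_orb, pv_mem_orb]
  constructor
  · rintro ⟨k, hk, hkw⟩
    rw [hstep k] at hkw
    exact pv_cyc_reduce hnd h hkw
  · rintro ⟨k, hk, hkw⟩
    have h2 : pvIter d (k + P) y = some w := by
      have hc : k + P = P + k := by omega
      rw [hc, pv_iter_add, hPy]
      simpa using hkw
    have h3 : pvIter d (k + P - 1) y' = some w := by
      rw [hstep]
      have : k + P - 1 + 1 = k + P := by omega
      rw [this]; exact h2
    exact pv_cyc_reduce hnd hcyc' h3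

theorem pv_orb_same_of_reach {d : PySem.Dict Char Char} (hnd : d.keys.Nodup) {y z : Char}
    (h : pvOnCyc d y) {k : Nat} (hk : pvIter d k y = some z) :
    pvOnCyc d z ∧ ∀ w, (w ∈ pvOrb d z ↔ w ∈ pvOrb d y) := by
  induction k generalizing y with
  | zero =>
      have : y = z := by simpa [pvIter] using hk
      subst this
      exact ⟨h, fun w => Iff.rfl⟩
  | succ k ih =>
      have h1 : (d.get? y).bind (pvIter d k) = some z := hk
      cases hgy : d.get? y with
      | none => rw [hgy] at h1; simp at h1
      | some y' =>
          rw [hgy] at h1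
          simp only [Option.bind_some] at h1
          obtain ⟨hcy', horb⟩ := pv_cyc_step hnd h hgy
          obtain ⟨hcz, horb'⟩ := ih hcy' h1
          exact ⟨hcz, fun w => (horb' w).trans (horb w)⟩

theorem pv_minC_congr {d : PySem.Dict Char Char} {y z : Char}
    (h : ∀ w, w ∈ pvOrb d z ↔ w ∈ pvOrb d y) : pvMinC d z = pvMinC d y := by
  unfold pvMinC
  have hz : z ∈ pvOrb d z := pv_mem_orb.mpr ⟨0, by omega, by simp [pvIter]⟩
  have hy : y ∈ pvOrb d y := pv_mem_orb.mpr ⟨0, by omega, by simp [pvIter]⟩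
  cases hmz : PySem.List.min? (pvOrb d z) (fun x => x) with
  | none => rw [PySem.List.min?_eq_none_iff] at hmz; rw [hmz] at hz; simp at hz
  | some mz =>
    cases hmy : PySem.List.min? (pvOrb d y) (fun x => x) with
    | none => rw [PySem.List.min?_eq_none_iff] at hmy; rw [hmy] at hy; simp at hy
    | some my =>
      simp only [Option.getD_some]
      have h1 : mz ≤ my :=
        PySem.List.min?_isMin hmz my ((h my).mpr (PySem.List.min?_mem hmy))
      have h2 : my ≤ mz :=
        PySem.List.min?_isMin hmy mz ((h mz).mp (PySem.List.min?_mem hmz))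
      exact le_antisymm h1 h2

theorem pv_loops_to_cycle {d : PySem.Dict Char Char} (hnd : d.keys.Nodup) {x : Char}
    (h : pvLoops d x) : ∃ j ≤ d.keys.length, ∃ z, pvIter d j x = some z ∧ pvOnCyc d z := by
  classical
  have hdef : ∀ j : Nat, ∃ v, pvIter d j x = some v ∧ v ∈ d.keys := by
    intro j
    obtain ⟨v, hv⟩ := Option.isSome_iff_exists.mp (h j)
    refine ⟨v, hv, ?_⟩
    have h2 := h (j + 1)
    rw [pv_iter_add, hv] at h2
    simp only [Option.bind_some] at h2
    cases hgv : d.get? v with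
    | none => simp [pvIter, hgv] at h2
    | some w => exact pv_mem_keys_of_get? hgv
  have hcard : (d.keys.toFinset).card < (Finset.range (d.keys.length + 1)).card := by
    rw [List.toFinset_card_of_nodup hnd, Finset.card_range]; omega
  have hmap : Set.MapsTo (fun j => (pvIter d j x).getD x) ↑(Finset.range (d.keys.length + 1))
      ↑(d.keys.toFinset) := by
    intro j _
    obtain ⟨v, hv, hvk⟩ := hdef j
    simp [hv, hvk]
  obtain ⟨a, ha, b, hb, hne, heq⟩ := Finset.exists_ne_map_eq_of_card_lt_of_maps_to hcard hmap
  simp only [Finset.mem_range] at ha hb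
  obtain ⟨va, hva, -⟩ := hdef a
  obtain ⟨vb, hvb, -⟩ := hdef b
  have hvab : va = vb := by simpa [hva, hvb] using heq
  have key : ∀ a b : Nat, a < b → b < d.keys.length + 1 → pvIter d a x = some va →
      pvIter d b x = some va → ∃ j ≤ d.keys.length, ∃ z, pvIter d j x = some z ∧ pvOnCyc d z := by
    intro a b hab hbn hia hib
    refine ⟨a, by omega, va, hia, ⟨b - a, by omega, ?_⟩⟩
    have h1 : b = a + (b - a) := by omega
    rw [h1, pv_iter_add, hia] at hib
    simpa using hib
  rcases Nat.lt_or_ge a b with hab | hab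
  · exact key a b hab hb hva (hvab ▸ hvb)
  · exact key b a (by omega) ha (hvab ▸ hvb) hva

theorem pv_loops_top_cyc {d : PySem.Dict Char Char} (hnd : d.keys.Nodup) {x z : Char}
    (h : pvLoops d x) (hz : pvIter d (d.keys.length + 1) x = some z) : pvOnCyc d z := by
  obtain ⟨j, hj, z0, hz0, hcy⟩ := pv_loops_to_cycle hnd h
  have h1 : pvIter d (d.keys.length + 1) x = pvIter d (d.keys.length + 1 - j) z0 := by
    have : d.keys.length + 1 = j + (d.keys.length + 1 - j) := by omega
    conv_lhs => rw [this]
    rw [pv_iter_add, hz0]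
    simp
  rw [h1] at hz
  exact (pv_orb_same_of_reach hnd hcy hz).1

theorem pv_termF_reach (d : PySem.Dict Char Char) (m : Nat) (x : Char) :
    ∃ k ≤ m, pvIter d k x = some (pvTermF d m x) := by
  induction m generalizing x with
  | zero => exact ⟨0, le_refl 0, by simp [pvIter, pvTermF]⟩
  | succ m ih =>
      cases hgx : d.get? x with
      | none => exact ⟨0, by omega, by simp [pvIter, pvTermF, hgx]⟩
      | some y =>
          obtain ⟨k, hk, hky⟩ := ih y
          refine ⟨k + 1, by omega, ?_⟩
          show (d.get? x).bind (pvIter d k) = _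
          rw [hgx]
          simpa [pvTermF, hgx] using hky

theorem pv_termF_none {d : PySem.Dict Char Char} {w : Char} (hw : d.get? w = none) :
    ∀ m, pvTermF d m w = w := by
  intro m
  induction m with
  | zero => rfl
  | succ m ih => simp [pvTermF, hw]

theorem pv_termF_stab {d : PySem.Dict Char Char} {e : Nat} {x w : Char}
    (he : pvIter d e x = some w) (hw : d.get? w = none) :
    ∀ m, e ≤ m → pvTermF d m x = w := by
  induction e generalizing x with
  | zero =>
      have hx : x = w := by simpa [pvIter] using he
      subst hx
      intro m _
      exact pv_termF_none hw m
  | succ e ih =>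
      intro m hm
      have h1 : (d.get? x).bind (pvIter d e) = some w := he
      cases hgx : d.get? x with
      | none => rw [hgx] at h1; simp at h1
      | some y =>
          rw [hgx] at h1
          simp only [Option.bind_some] at h1
          match m, hm with
          | m' + 1, hm' =>
            show pvTermF d (m' + 1) x = w
            simp only [pvTermF, hgx]
            exact ih h1 m' (by omega)

theorem pv_term_edge {d : PySem.Dict Char Char} (hnd : d.keys.Nodup) {x y : Char}
    (h : d.get? x = some y) : pvTerm d x = pvTerm d y := by
  have hshift : ∀ k : Nat, pvIter d k y = pvIter d (k + 1) x := by
    intro k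
    have h1 : k + 1 = 1 + k := by omega
    rw [h1, pv_iter_add]
    simp [pvIter, h]
  unfold pvTerm
  cases hx : pvIter d (d.keys.length + 1) x with
  | some z =>
      have hloops : pvLoops d x := pv_pigeon hnd (by simp [hx])
      have hcy : pvOnCyc d z := pv_loops_top_cyc hnd hloops hx
      have hz' : pvIter d (d.keys.length + 1) y = pvIter d 1 z := by
        rw [hshift, pv_iter_add, hx]; simp
      cases hz'' : pvIter d 1 z with
      | none =>
          exfalso
          have h2 := hloops (d.keys.length + 1 + 1)
          rw [pv_iter_add, hx] at h2
          simp only [Option.bind_some] at h2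
          rw [hz''] at h2
          simp at h2
      | some z2 =>
          rw [hz''] at hz'
          rw [hz']
          exact (pv_minC_congr (pv_orb_same_of_reach hnd hcy hz'').2).symm
  | none =>
      have hnl : ¬ pvLoops d x := by
        intro hl
        have := hl (d.keys.length + 1)
        rw [hx] at this
        simp at this
      have hy' : pvIter d (d.keys.length + 1) y = none := by
        rw [hshift]
        have h1 : d.keys.length + 1 + 1 = (d.keys.length + 1) + 1 := rfl
        rw [h1, pv_iter_add, hx]
        rfl
      rw [hy']
      obtain ⟨e, he, w, hew, hw⟩ := pv_exit hnd hnl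
      have hx1 : pvTermF d (d.keys.length + 1) x = w := pv_termF_stab hew hw _ (by omega)
      match e, hew with
      | 0, hew =>
          exfalso
          have : x = w := by simpa [pvIter] using hew
          rw [this, hw] at h
          simp at h
      | e' + 1, hew =>
          have hey : pvIter d e' y = some w := by
            rw [hshift]; exact hew
          have hy1 : pvTermF d (d.keys.length + 1) y = w := pv_termF_stab hey hw _ (by omega)
          rw [hx1, hy1]

theorem pv_term_reach {d : PySem.Dict Char Char} (hnd : d.keys.Nodup) (x : Char) :
    ∃ k, pvIter d k x = some (pvTerm d x) := by
  unfold pvTerm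
  cases hx : pvIter d (d.keys.length + 1) x with
  | some z =>
      have hz : z ∈ pvOrb d z := pv_mem_orb.mpr ⟨0, by omega, by simp [pvIter]⟩
      cases hm : PySem.List.min? (pvOrb d z) (fun x => x) with
      | none => rw [PySem.List.min?_eq_none_iff] at hm; rw [hm] at hz; simp at hz
      | some m =>
          have hmem : m ∈ pvOrb d z := PySem.List.min?_mem hm
          obtain ⟨j, hj, hjm⟩ := pv_mem_orb.mp hmem
          refine ⟨d.keys.length + 1 + j, ?_⟩
          rw [pv_iter_add, hx]
          simpa [pvMinC, hm] using hjm
  | none =>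
      obtain ⟨k, hk, hkx⟩ := pv_termF_reach d (d.keys.length + 1) x
      exact ⟨k, hkx⟩

theorem pv_orb_mem_keys {d : PySem.Dict Char Char} {z w : Char} (hz : pvOnCyc d z)
    (hw : w ∈ pvOrb d z) : w ∈ d.keys := by
  obtain ⟨k, hk, hkw⟩ := pv_mem_orb.mp hw
  have hl := pv_cyc_loops hz
  have h2 := hl (k + 1)
  rw [pv_iter_add, hkw] at h2
  simp only [Option.bind_some] at h2
  cases hgw : d.get? w with
  | none => simp [pvIter, hgw] at h2
  | some v => exact pv_mem_keys_of_get? hgw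

theorem pv_minC_mem {d : PySem.Dict Char Char} (z : Char) : pvMinC d z ∈ pvOrb d z := by
  have hz : z ∈ pvOrb d z := pv_mem_orb.mpr ⟨0, by omega, by simp [pvIter]⟩
  unfold pvMinC
  cases hm : PySem.List.min? (pvOrb d z) (fun x => x) with
  | none => rw [PySem.List.min?_eq_none_iff] at hm; rw [hm] at hz; simp at hz
  | some m => simpa using PySem.List.min?_mem hm

theorem pv_loops_iff_term_mem {d : PySem.Dict Char Char} (hnd : d.keys.Nodup) (x : Char) :
    pvLoops d x ↔ pvTerm d x ∈ d.keys := by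
  constructor
  · intro hl
    have hsome := hl (d.keys.length + 1)
    obtain ⟨z, hz⟩ := Option.isSome_iff_exists.mp hsome
    have hcy := pv_loops_top_cyc hnd hl hz
    have : pvTerm d x = pvMinC d z := by unfold pvTerm; rw [hz]
    rw [this]
    exact pv_orb_mem_keys hcy (pv_minC_mem z)
  · intro hmem
    by_contra hnl
    obtain ⟨e, he, w, hew, hw⟩ := pv_exit hnd hnl
    have hx : pvIter d (d.keys.length + 1) x = none := by
      cases hc : pvIter d (d.keys.length + 1) x with
      | none => rfl
      | some z => exact absurd (pv_pigeon hnd (by simp [hc])) hnl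
    have hterm : pvTerm d x = w := by
      unfold pvTerm; rw [hx]; exact pv_termF_stab hew hw _ (by omega)
    rw [hterm] at hmem
    exact absurd hmem ((PySem.Dict.get?_eq_none_iff_not_mem_keys d w).mp hw)

theorem pv_term_cyc {d : PySem.Dict Char Char} (hnd : d.keys.Nodup) {x : Char}
    (h : pvLoops d x) : pvOnCyc d (pvTerm d x) ∧ pvTerm d (pvTerm d x) = pvTerm d x := by
  obtain ⟨z, hz⟩ := Option.isSome_iff_exists.mp (h (d.keys.length + 1))
  have hcy := pv_loops_top_cyc hnd h hz
  have hterm : pvTerm d x = pvMinC d z := by unfold pvTerm; rw [hz]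
  set t := pvMinC d z with ht
  obtain ⟨k, hk, hkt⟩ := pv_mem_orb.mp (pv_minC_mem z)
  obtain ⟨hct, horbt⟩ := pv_orb_same_of_reach hnd hcy hkt
  have hlt : pvLoops d t := pv_cyc_loops hct
  obtain ⟨z2, hz2⟩ := Option.isSome_iff_exists.mp (hlt (d.keys.length + 1))
  obtain ⟨hcz2, horb2⟩ := pv_orb_same_of_reach hnd hct hz2
  have htt : pvTerm d t = pvMinC d z2 := by unfold pvTerm; rw [hz2]
  have hmin2 : pvMinC d z2 = pvMinC d z :=
    (pv_minC_congr horb2).trans (pv_minC_congr horbt)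
  constructor
  · rw [hterm]; exact hct
  · rw [hterm, htt, hmin2, ← ht]

theorem pv_ER_of_reach {d : PySem.Dict Char Char} {x y : Char} {k : Nat}
    (h : pvIter d k x = some y) : pvER d x y := by
  induction k generalizing x with
  | zero =>
      have : x = y := by simpa [pvIter] using h
      rw [this]
      exact Relation.EqvGen.refl y
  | succ k ih =>
      have h1 : (d.get? x).bind (pvIter d k) = some y := h
      cases hgx : d.get? x with
      | none => rw [hgx] at h1; simp at h1
      | some x' =>
          rw [hgx] at h1
          simp only [Option.bind_some] at h1
          exact Relation.EqvGen.trans _ _ _ (Relation.EqvGen.rel _ _ hgx) (ih h1)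

theorem pv_term_eq_iff_ER {d : PySem.Dict Char Char} (hnd : d.keys.Nodup) (x y : Char) :
    pvTerm d x = pvTerm d y ↔ pvER d x y := by
  constructor
  · intro hterm
    obtain ⟨kx, hkx⟩ := pv_term_reach hnd x
    obtain ⟨ky, hky⟩ := pv_term_reach hnd y
    have h1 := pv_ER_of_reach hkx
    have h2 := pv_ER_of_reach hky
    rw [hterm] at h1
    exact Relation.EqvGen.trans _ _ _ h1 (Relation.EqvGen.symm _ _ h2)
  · intro her
    induction her with
    | rel a b hab => exact pv_term_edge hnd hab
    | refl a => rfl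
    | symm a b _ ih => exact ih.symm
    | trans a b c _ _ ih1 ih2 => exact ih1.trans ih2

-- B counts a key iff it is on a cycle and is the minimum of its orbit,
-- iff (loops ∧ term = self)
theorem pv_cyc_min_iff {d : PySem.Dict Char Char} (hnd : d.keys.Nodup) (x : Char) :
    (pvOnCyc d x ∧ x = pvMinC d x) ↔ (pvLoops d x ∧ pvTerm d x = x) := by
  constructor
  · rintro ⟨hcx, hmx⟩
    have hl := pv_cyc_loops hcx
    refine ⟨hl, ?_⟩
    obtain ⟨z, hz⟩ := Option.isSome_iff_exists.mp (hl (d.keys.length + 1))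
    obtain ⟨-, horb⟩ := pv_orb_same_of_reach hnd hcx hz
    have : pvTerm d x = pvMinC d z := by unfold pvTerm; rw [hz]
    rw [this, pv_minC_congr horb, ← hmx]
  · rintro ⟨hl, ht⟩
    obtain ⟨z, hz⟩ := Option.isSome_iff_exists.mp (hl (d.keys.length + 1))
    have hcy := pv_loops_top_cyc hnd hl hz
    have hterm : pvTerm d x = pvMinC d z := by unfold pvTerm; rw [hz]
    have hxz : x ∈ pvOrb d z := by
      rw [← ht, hterm]; exact pv_minC_mem z
    obtain ⟨k, hk, hkx⟩ := pv_mem_orb.mp hxz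
    obtain ⟨hcx, horb⟩ := pv_orb_same_of_reach hnd hcy hkx
    refine ⟨hcx, ?_⟩
    rw [pv_minC_congr horb, ← hterm, ht]

-- ---------- hasLoop port ↔ pvLoops ----------

theorem pv_hasLoop_true {d : PySem.Dict Char Char} (hnd : d.keys.Nodup) :
    ∀ fuel (ch : Char) (vis : PySem.Set Char), vis.Nodup → (∀ c ∈ vis, c ∈ d.keys) →
      d.keys.length - vis.length < fuel → pvLoops d ch → pvHasLoop fuel d ch vis = true := by
  intro fuel
  induction fuel with
  | zero => intro ch vis _ _ hf _; omega
  | succ fuel ih =>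
      intro ch vis hvnd hvk hf hl
      show pvHasLoop (fuel + 1) d ch vis = true
      cases hc : vis.contains ch with
      | true => rw [pvHasLoop, hc]; simp
      | false =>
          have hch : ch ∉ vis := by
            intro hmem
            rw [(PySem.Set.contains_iff vis ch).mpr hmem] at hc
            simp at hc
          have h1 := hl 1
          cases hgch : d.get? ch with
          | none => simp [pvIter, hgch] at h1
          | some t =>
              have hckeys : ch ∈ d.keys := pv_mem_keys_of_get? hgch
              have hlt : pvLoops d t := by
                intro k
                have h2 := hl (k + 1)
                have h3 : pvIter d (k + 1) ch = (d.get? ch).bind (pvIter d k) := by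
                  have : k + 1 = 1 + k := by omega
                  rw [this, pv_iter_add]
                  simp [pvIter]
                rw [h3, hgch] at h2
                simpa using h2
              have hsub : vis.length < d.keys.length := by
                have hle : vis.length ≤ d.keys.length := by
                  have h4 : vis.toFinset.card = vis.length := List.toFinset_card_of_nodup hvnd
                  have h5 : d.keys.toFinset.card = d.keys.length := List.toFinset_card_of_nodup hnd
                  have h6 : vis.toFinset ⊆ d.keys.toFinset := by
                    intro a ha
                    simp only [List.mem_toFinset] at ha ⊢
                    exact hvk a ha
                  have := Finset.card_le_card h6
                  omega
                rcases Nat.lt_or_ge vis.length d.keys.length with h7 | h7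
                · exact h7
                · exfalso
                  have h8 : vis.toFinset = d.keys.toFinset := by
                    apply Finset.eq_of_subset_of_card_le
                    · intro a ha
                      simp only [List.mem_toFinset] at ha ⊢
                      exact hvk a ha
                    · rw [List.toFinset_card_of_nodup hvnd, List.toFinset_card_of_nodup hnd]
                      omega
                  apply hch
                  have : ch ∈ vis.toFinset := by rw [h8]; simp [hckeys]
                  simpa using this
              have hrec := ih t (PySem.Set.add vis ch)
                (PySem.Set.nodup_add vis ch hvnd)
                (by
                  intro c hcm
                  rcases (PySem.Set.mem_add vis ch c).mp hcm with h | h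
                  · exact hvk c h
                  · rw [h]; exact hckeys)
                (by
                  rw [PySem.Set.add_of_not_mem hch]
                  simp only [List.length_append, List.length_cons, List.length_nil]
                  omega)
                hlt
              rw [pvHasLoop, hc, hgch]
              exact hrec

theorem pv_hasLoop_false {d : PySem.Dict Char Char} (hnd : d.keys.Nodup) :
    ∀ e fuel (ch : Char) (vis : PySem.Set Char) (w : Char), pvIter d e ch = some w →
      d.get? w = none → e < fuel →
      (∀ j w', j ≤ e → pvIter d j ch = some w' → w' ∉ vis) →
      pvHasLoop fuel d ch vis = false := by
  intro e
  induction e with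
  | zero =>
      intro fuel ch vis w hiter hw hfuel hdisj
      have hcw : ch = w := by simpa [pvIter] using hiter
      subst hcw
      match fuel, hfuel with
      | f + 1, _ =>
        have hch : ch ∉ vis := hdisj 0 ch (by omega) (by simp [pvIter])
        have hc : vis.contains ch = false := by
          cases hc : vis.contains ch with
          | false => rfl
          | true => exact absurd ((PySem.Set.contains_iff vis ch).mp hc) hch
        rw [pvHasLoop, hc, hw]; simp
  | succ e ih =>
      intro fuel ch vis w hiter hw hfuel hdisj
      match fuel, hfuel with
      | f + 1, hfuel =>
        have hch : ch ∉ vis := hdisj 0 ch (by omega) (by simp [pvIter])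
        have hc : vis.contains ch = false := by
          cases hc : vis.contains ch with
          | false => rfl
          | true => exact absurd ((PySem.Set.contains_iff vis ch).mp hc) hch
        have h1 : (d.get? ch).bind (pvIter d e) = some w := hiter
        cases hgch : d.get? ch with
        | none => rw [hgch] at h1; simp at h1
        | some t =>
            rw [hgch] at h1
            simp only [Option.bind_some] at h1
            have hshift : ∀ j : Nat, pvIter d j t = pvIter d (j + 1) ch := by
              intro j
              have hj : j + 1 = 1 + j := by omega
              rw [hj, pv_iter_add]
              simp [pvIter, hgch]
            have hnl : ¬ pvLoops d ch := by
              intro hl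
              have h2 := hl (e + 1 + 1)
              have h3 : pvIter d (e + 1 + 1) ch = (pvIter d (e + 1) ch).bind (pvIter d 1) := by
                rw [← pv_iter_add]
              rw [h3, hiter] at h2
              simp [pvIter, hw] at h2
            have hrec := ih f t (PySem.Set.add vis ch) w (by rw [hshift]; exact hiter)
              hw (by omega)
              (by
                intro j w' hj hjw' hmem
                rcases (PySem.Set.mem_add vis ch w').mp hmem with hm | hm
                · exact hdisj (j + 1) w' (by omega) (by rw [← hshift]; exact hjw') hm
                · apply hnl
                  rw [hm] at hjw'
                  rw [hshift] at hjw'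
                  exact pv_repeat_loops (a := 0) (b := j + 1) (by simp [pvIter]) hjw' (by omega))
            rw [pvHasLoop, hc, hgch]
            simp [hrec]

theorem pv_hasLoop_spec {d : PySem.Dict Char Char} (hnd : d.keys.Nodup) (ch : Char) :
    pvHasLoop (d.keys.length + 1) d ch PySem.Set.empty = true ↔ pvLoops d ch := by
  constructor
  · intro h
    by_contra hnl
    obtain ⟨e, he, w, hew, hw⟩ := pv_exit hnd hnl
    have := pv_hasLoop_false hnd e (d.keys.length + 1) ch PySem.Set.empty w hew hw (by omega)
      (by intro j w' _ _ hmem; simp [PySem.Set.empty] at hmem)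
    rw [this] at h
    simp at h
  · intro hl
    exact pv_hasLoop_true hnd (d.keys.length + 1) ch PySem.Set.empty List.nodup_nil
      (by intro c hcm; simp [PySem.Set.empty] at hcm)
      (by simp [PySem.Set.empty]) hl

-- ---------- cycle_of port ↔ pvOnCyc / minimum of the orbit ----------

theorem pv_cycGo_none {d : PySem.Dict Char Char} :
    ∀ fuel (ch cur : Char) (seen : List Char),
      (∀ m, m < fuel → pvIter d (m + 1) cur ≠ some ch) →
      pvCycGo fuel d ch cur seen = none := by
  intro fuel
  induction fuel with
  | zero => intro ch cur seen _; rfl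
  | succ fuel ih =>
      intro ch cur seen h
      show pvCycGo (fuel + 1) d ch cur seen = none
      cases hg : d.get? cur with
      | none => rw [pvCycGo, hg]
      | some nxt =>
          have hne : nxt ≠ ch := by
            intro he
            apply h 0 (by omega)
            simp [pvIter, hg, he]
          rw [pvCycGo, hg]
          simp only [if_neg hne]
          apply ih
          intro m hm
          have h2 := h (m + 1) (by omega)
          intro he
          apply h2
          have h3 : m + 1 + 1 = 1 + (m + 1) := by omega
          rw [h3, pv_iter_add]
          simpa [pvIter, hg] using he

theorem pv_cycGo_some {d : PySem.Dict Char Char} :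
    ∀ m0 fuel (ch cur : Char) (seen : List Char), m0 < fuel →
      pvIter d (m0 + 1) cur = some ch → (∀ j, j < m0 → pvIter d (j + 1) cur ≠ some ch) →
      ∃ L, pvCycGo fuel d ch cur seen = some (seen ++ L) ∧
        ∀ w, (w ∈ L ↔ ∃ j ≤ m0, pvIter d j cur = some w) := by
  intro m0
  induction m0 with
  | zero =>
      intro fuel ch cur seen hfuel hit _
      match fuel, hfuel with
      | f + 1, _ =>
        have hg : d.get? cur = some ch := by simpa [pvIter] using hit
        refine ⟨[cur], ?_, ?_⟩
        · rw [pvCycGo, hg]; simp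
        · intro w
          simp only [List.mem_singleton]
          constructor
          · intro hw; exact ⟨0, by omega, by simp [pvIter, hw]⟩
          · rintro ⟨j, hj, hjw⟩
            have : j = 0 := by omega
            subst this
            simpa [pvIter] using hjw.symm
  | succ m0 ih =>
      intro fuel ch cur seen hfuel hit hmin
      match fuel, hfuel with
      | f + 1, hfuel =>
        have hg : (d.get? cur).isSome := by
          have h1 : (pvIter d 1 cur).isSome := pv_iter_mono d (b := m0 + 1 + 1) (by omega) (by simp [hit])
          cases hgc : d.get? cur with
          | none => simp [pvIter, hgc] at h1
          | some nxt => simp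
        obtain ⟨nxt, hgc⟩ := Option.isSome_iff_exists.mp hg
        have hshift : ∀ j : Nat, pvIter d j nxt = pvIter d (j + 1) cur := by
          intro j
          have h1 : j + 1 = 1 + j := by omega
          rw [h1, pv_iter_add]
          simp [pvIter, hgc]
        have hne : nxt ≠ ch := by
          intro he
          exact hmin 0 (by omega) (by simp [pvIter, hgc, he])
        obtain ⟨L', hL', hmemL'⟩ := ih f ch nxt (seen ++ [cur]) (by omega)
          (by rw [hshift]; exact hit)
          (by
            intro j hj
            rw [hshift]
            exact hmin (j + 1) (by omega))
        refine ⟨cur :: L', ?_, ?_⟩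
        · rw [pvCycGo, hgc]
          simp only [if_neg hne]
          rw [hL']
          simp
        · intro w
          simp only [List.mem_cons]
          constructor
          · rintro (hw | hw)
            · exact ⟨0, by omega, by simp [pvIter, hw]⟩
            · obtain ⟨j, hj, hjw⟩ := (hmemL' w).mp hw
              rw [hshift] at hjw
              exact ⟨j + 1, by omega, hjw⟩
          · rintro ⟨j, hj, hjw⟩
            match j, hjw with
            | 0, hjw => left; simpa [pvIter] using hjw.symm
            | j' + 1, hjw =>
                right
                apply (hmemL' w).mpr
                exact ⟨j', by omega, by rw [hshift]; exact hjw⟩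

theorem pv_cycleOf_spec {d : PySem.Dict Char Char} (hnd : d.keys.Nodup) (ch : Char) :
    (pvOnCyc d ch → ∃ cyc, pvCycleOf d ch = some cyc ∧
        ∀ w, (w ∈ cyc ↔ w ∈ pvOrb d ch)) ∧
      (¬ pvOnCyc d ch → pvCycleOf d ch = none) := by
  constructor
  · intro hcy
    obtain ⟨P, hP0, hPn, hPy, hPmin⟩ := pv_cyc_min_period hnd hcy
    have hred : ∀ k (w' : Char), pvIter d k ch = some w' → ∃ j ≤ P - 1, pvIter d j ch = some w' := by
      intro k
      induction k using Nat.strong_induction_on with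
      | _ k ihk => ?_
      intro w' hk
      by_cases hkP : k ≤ P - 1
      · exact ⟨k, hkP, hk⟩
      · have h1 : k = P + (k - P) := by omega
        rw [h1, pv_iter_add, hPy] at hk
        simp only [Option.bind_some] at hk
        exact ihk (k - P) (by omega) w' hk
    have hm0 : P - 1 < d.keys.length := by omega
    obtain ⟨L, hL, hmem⟩ := pv_cycGo_some (P - 1) d.keys.length ch ch [] hm0
      (by have : P - 1 + 1 = P := by omega
          rw [this]; exact hPy)
      (by
        intro j hj
        exact hPmin (j + 1) (by omega) (by omega))
    refine ⟨L, by simpa [pvCycleOf] using hL, ?_⟩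
    intro w
    rw [hmem w, pv_mem_orb]
    constructor
    · rintro ⟨j, hj, hjw⟩; exact ⟨j, by omega, hjw⟩
    · rintro ⟨j, hj, hjw⟩; exact hred j w hjw
  · intro hncy
    apply pv_cycGo_none
    intro m hm he
    exact hncy ⟨m + 1, by omega, he⟩

-- B's per-key predicate, in closed form
theorem pv_predB_iff {d : PySem.Dict Char Char} (hnd : d.keys.Nodup) (ch : Char) :
    (match pvCycleOf d ch with
      | some cyc => decide (ch = (PySem.List.min? cyc (fun x => x)).getD ch)
      | none => false) =
      ((pvIter d (d.keys.length + 1) ch).isSome && decide (pvTerm d ch = ch)) := by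
  by_cases hcy : pvOnCyc d ch
  · obtain ⟨cyc, hc, hmem⟩ := (pv_cycleOf_spec hnd ch).1 hcy
    have hl := pv_cyc_loops hcy
    have hs : (pvIter d (d.keys.length + 1) ch).isSome := hl _
    have hminval : (PySem.List.min? cyc (fun x => x)).getD ch = pvMinC d ch := by
      have hch : ch ∈ pvOrb d ch := pv_mem_orb.mpr ⟨0, by omega, by simp [pvIter]⟩
      cases hmc : PySem.List.min? cyc (fun x => x) with
      | none =>
          rw [PySem.List.min?_eq_none_iff] at hmc
          rw [hmc] at hmem
          exact absurd ((hmem ch).mpr hch) (by simp)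
      | some m1 =>
          unfold pvMinC
          cases hmo : PySem.List.min? (pvOrb d ch) (fun x => x) with
          | none =>
              rw [PySem.List.min?_eq_none_iff] at hmo
              rw [hmo] at hch
              simp at hch
          | some m2 =>
              simp only [Option.getD_some]
              have h1 : m1 ≤ m2 :=
                PySem.List.min?_isMin hmc m2 ((hmem m2).mpr (PySem.List.min?_mem hmo))
              have h2 : m2 ≤ m1 :=
                PySem.List.min?_isMin hmo m1 ((hmem m1).mp (PySem.List.min?_mem hmc))
              exact le_antisymm h1 h2
    have hiff : (ch = pvMinC d ch) ↔ (pvTerm d ch = ch) := by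
      constructor
      · intro h; exact ((pv_cyc_min_iff hnd ch).mp ⟨hcy, h⟩).2
      · intro h; exact ((pv_cyc_min_iff hnd ch).mpr ⟨hl, h⟩).2
    rw [hc]
    simp only [hminval, hs, Bool.true_and]
    exact decide_eq_decide.mpr hiff
  · rw [(pv_cycleOf_spec hnd ch).2 hcy]
    by_cases hs : (pvIter d (d.keys.length + 1) ch).isSome
    · have hl := pv_pigeon hnd hs
      have hne : pvTerm d ch ≠ ch := fun h => hcy ((pv_cyc_min_iff hnd ch).mpr ⟨hl, h⟩).1
      simp [hs, hne]
    · rw [Bool.not_eq_true] at hs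
      simp [hs]

-- ---------- union-find theory ----------

def pvStepN (p : List Int) (i : Nat) : Nat := (pvGetP p (i : Int)).toNat
def pvFxN (p : List Int) (i : Nat) : Prop := pvStepN p i = i
def pvRootN (p : List Int) (i : Nat) : Nat := (pvStepN p)^[128] i
def pvInv (p : List Int) : Prop :=
  p.length = 128 ∧
  (∀ i : Nat, i < 128 → pvGetP p (i : Int) = ((pvStepN p i : Nat) : Int) ∧ pvStepN p i < 128) ∧
  (∀ i : Nat, i < 128 → ∃ k, pvFxN p ((pvStepN p)^[k] i))

theorem pv_getP_set {p : List Int} (hl : p.length = 128) {j : Nat} (hj : j < 128) (w : Int)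
    (x : Nat) : pvGetP (pvSetP p (j : Int) w) (x : Int) = if x = j then w else pvGetP p (x : Int) := by
  unfold pvGetP pvSetP
  rw [PySem.List.pySetD_natCast, PySem.List.pyGet?_natCast, PySem.List.pyGet?_natCast,
    List.getElem?_set]
  by_cases hxj : x = j
  · subst hxj
    simp [hl, hj]
  · have hjx : ¬ (j = x) := fun h => hxj h.symm
    simp [hjx, hxj]

theorem pv_stepN_set {p : List Int} (hl : p.length = 128) {j : Nat} (hj : j < 128) (w : Int)
    (x : Nat) : pvStepN (pvSetP p (j : Int) w) x = if x = j then w.toNat else pvStepN p x := by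
  unfold pvStepN
  rw [pv_getP_set hl hj]
  by_cases hxj : x = j <;> simp [hxj]

theorem pv_setP_length {p : List Int} {j : Nat} (w : Int) :
    (pvSetP p (j : Int) w).length = p.length := by
  unfold pvSetP
  rw [PySem.List.pySetD_natCast, List.length_set]

theorem pv_fix_iterate {p : List Int} {j : Nat} (h : pvFxN p j) (k : Nat) :
    (pvStepN p)^[k] j = j := by
  induction k with
  | zero => rfl
  | succ k ih => rw [Function.iterate_succ_apply, h, ih]

theorem pv_iterN_lt {p : List Int} (hInv : pvInv p) {i : Nat} (hi : i < 128) (k : Nat) :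
    (pvStepN p)^[k] i < 128 := by
  induction k generalizing i with
  | zero => exact hi
  | succ k ih =>
      rw [Function.iterate_succ_apply]
      exact ih ((hInv.2.1 i hi).2)

theorem pv_stab {p : List Int} {i k : Nat} (h : pvFxN p ((pvStepN p)^[k] i)) (hk : k ≤ 128) :
    pvRootN p i = (pvStepN p)^[k] i := by
  unfold pvRootN
  have h1 : 128 = k + (128 - k) := by omega
  rw [h1, Nat.add_comm, Function.iterate_add_apply]
  exact pv_fix_iterate h (128 - k)

theorem pv_small {p : List Int} (hInv : pvInv p) {i : Nat} (hi : i < 128) :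
    ∃ m ≤ 127, pvFxN p ((pvStepN p)^[m] i) := by
  classical
  have hex := hInv.2.2 i hi
  have hfind : pvFxN p ((pvStepN p)^[Nat.find hex] i) := Nat.find_spec hex
  set k0 := Nat.find hex with hk0
  refine ⟨k0, ?_, hfind⟩
  by_contra hgt
  have key : ∀ a b : Nat, a < b → b ≤ k0 → (pvStepN p)^[a] i = (pvStepN p)^[b] i → False := by
    intro a b hab hbk heq
    have h1 : (pvStepN p)^[k0] i = (pvStepN p)^[a + (k0 - b)] i := by
      have h2 : k0 = (k0 - b) + b := by omega
      rw [h2, Function.iterate_add_apply, ← heq, ← Function.iterate_add_apply]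
      congr 1
      omega
    have h3 : pvFxN p ((pvStepN p)^[a + (k0 - b)] i) := by rw [← h1]; exact hfind
    have h4 : k0 ≤ a + (k0 - b) := by rw [hk0]; exact Nat.find_le h3
    omega
  have hcard : (Finset.range 128).card < (Finset.range (k0 + 1)).card := by
    simp; omega
  have hmap : Set.MapsTo (fun j => (pvStepN p)^[j] i) ↑(Finset.range (k0 + 1))
      ↑(Finset.range 128) := by
    intro j _
    simp only [Finset.coe_range, Set.mem_Iio]
    exact pv_iterN_lt hInv hi j
  obtain ⟨a, ha, b, hb, hne, heq⟩ := Finset.exists_ne_map_eq_of_card_lt_of_maps_to hcard hmap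
  simp only [Finset.mem_range] at ha hb
  rcases Nat.lt_or_ge a b with h | h
  · exact key a b h (by omega) heq
  · exact key b a (by omega) (by omega) heq.symm

theorem pv_root_fix {p : List Int} (hInv : pvInv p) {i : Nat} (hi : i < 128) :
    pvFxN p (pvRootN p i) ∧ pvRootN p i < 128 := by
  obtain ⟨m, hm, hfx⟩ := pv_small hInv hi
  rw [pv_stab hfx (by omega)]
  exact ⟨hfx, pv_iterN_lt hInv hi m⟩

theorem pv_root_step {p : List Int} (hInv : pvInv p) {i : Nat} (hi : i < 128) :
    pvRootN p (pvStepN p i) = pvRootN p i := by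
  unfold pvRootN
  rw [← Function.iterate_succ_apply, Function.iterate_succ_apply']
  exact (pv_root_fix hInv hi).1

theorem pv_root_of_fix {p : List Int} {i : Nat} (h : pvFxN p i) : pvRootN p i = i := by
  unfold pvRootN
  exact pv_fix_iterate h 128

theorem pv_set_spec {p : List Int} (hInv : pvInv p) {j v : Nat} (hj : j < 128) (hv : v < 128)
    (hvf : pvFxN p v) (hcase : pvFxN p j ∨ v = pvRootN p j) :
    pvInv (pvSetP p (j : Int) ((v : Nat) : Int)) ∧
      ∀ x, x < 128 → pvRootN (pvSetP p (j : Int) ((v : Nat) : Int)) x =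
        if pvRootN p x = pvRootN p j then v else pvRootN p x := by
  have hl : p.length = 128 := hInv.1
  set p' := pvSetP p (j : Int) ((v : Nat) : Int) with hp'
  have hstep : ∀ x : Nat, pvStepN p' x = if x = j then v else pvStepN p x := by
    intro x
    rw [hp', pv_stepN_set hl hj]
    simp
  have hlen' : p'.length = 128 := by rw [hp', pv_setP_length]; exact hl
  have hvf' : pvFxN p' v := by
    unfold pvFxN
    rw [hstep]
    by_cases hvj : v = j
    · simp [hvj]
    · simp only [if_neg hvj]; exact hvf
  have hrange' : ∀ x : Nat, x < 128 →
      pvGetP p' (x : Int) = ((pvStepN p' x : Nat) : Int) ∧ pvStepN p' x < 128 := by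
    intro x hx
    constructor
    · rw [hp', pv_getP_set hl hj, pv_stepN_set hl hj]
      by_cases hxj : x = j
      · simp [hxj]
      · rw [if_neg hxj, if_neg hxj]
        exact (hInv.2.1 x hx).1
    · rw [hstep]
      by_cases hxj : x = j
      · simp [hxj, hv]
      · rw [if_neg hxj]
        exact (hInv.2.1 x hx).2
  have base : ∀ x : Nat, x < 128 → pvFxN p x →
      ∃ k ≤ 1, pvFxN p' ((pvStepN p')^[k] x) ∧
        (pvStepN p')^[k] x = (if pvRootN p x = pvRootN p j then v else pvRootN p x) := by
    intro x hx hfx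
    by_cases hxj : x = j
    · subst hxj
      refine ⟨1, by omega, ?_, ?_⟩
      · simp only [Function.iterate_one]
        rw [show pvStepN p' x = v by rw [hstep]; simp]
        exact hvf'
      · simp only [Function.iterate_one]
        rw [show pvStepN p' x = v by rw [hstep]; simp]
        simp
    · refine ⟨0, by omega, ?_, ?_⟩
      · simp only [Function.iterate_zero, id]
        unfold pvFxN
        rw [hstep, if_neg hxj]
        exact hfx
      · simp only [Function.iterate_zero, id]
        rw [pv_root_of_fix hfx]
        by_cases hxr : x = pvRootN p j
        · rcases hcase with hfj | hvr
          · rw [pv_root_of_fix hfj] at hxr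
            exact absurd hxr hxj
          · rw [if_pos hxr, hvr, hxr]
        · rw [if_neg hxr]
  have main : ∀ m (x : Nat), x < 128 → pvFxN p ((pvStepN p)^[m] x) →
      ∃ k ≤ m + 1, pvFxN p' ((pvStepN p')^[k] x) ∧
        (pvStepN p')^[k] x = (if pvRootN p x = pvRootN p j then v else pvRootN p x) := by
    intro m
    induction m with
    | zero =>
        intro x hx hfx
        simp only [Function.iterate_zero, id] at hfx
        obtain ⟨k, hk, h1, h2⟩ := base x hx hfx
        exact ⟨k, by omega, h1, h2⟩
    | succ m ih =>
        intro x hx hfx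
        by_cases hfxx : pvFxN p x
        · obtain ⟨k, hk, h1, h2⟩ := base x hx hfxx
          exact ⟨k, by omega, h1, h2⟩
        · by_cases hxj : x = j
          · subst hxj
            rcases hcase with hfj | hvr
            · exact absurd hfj hfxx
            · refine ⟨1, by omega, ?_, ?_⟩
              · simp only [Function.iterate_one]
                rw [show pvStepN p' x = v by rw [hstep]; simp]
                exact hvf'
              · simp only [Function.iterate_one]
                rw [show pvStepN p' x = v by rw [hstep]; simp]
                simp
          · rw [Function.iterate_succ_apply] at hfx
            obtain ⟨k, hk, h1, h2⟩ := ih (pvStepN p x) ((hInv.2.1 x hx).2) hfx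
            rw [pv_root_step hInv hx] at h2
            refine ⟨k + 1, by omega, ?_, ?_⟩
            · rw [Function.iterate_succ_apply]
              rw [show pvStepN p' x = pvStepN p x by rw [hstep, if_neg hxj]]
              exact h1
            · rw [Function.iterate_succ_apply]
              rw [show pvStepN p' x = pvStepN p x by rw [hstep, if_neg hxj]]
              exact h2
  constructor
  · refine ⟨hlen', hrange', ?_⟩
    intro x hx
    obtain ⟨m, hm, hfx⟩ := pv_small hInv hx
    obtain ⟨k, hk, hfx', -⟩ := main m x hx hfx
    exact ⟨k, hfx'⟩
  · intro x hx
    obtain ⟨m, hm, hfx⟩ := pv_small hInv hx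
    obtain ⟨k, hk, hfx', hval⟩ := main m x hx hfx
    rw [pv_stab hfx' (by omega)]
    exact hval

theorem pv_find_spec {p : List Int} (hInv : pvInv p) :
    ∀ m (i : Nat) (fuel : Nat), i < 128 → pvFxN p ((pvStepN p)^[m] i) → m < fuel →
      ∃ p', pvFind fuel p (i : Int) = (((pvRootN p i : Nat) : Int), p') ∧ pvInv p' ∧
        ∀ x, x < 128 → pvRootN p' x = pvRootN p x := by
  intro m
  induction m with
  | zero =>
      intro i fuel hi hfx hm
      match fuel, hm with
      | fl + 1, _ =>
        simp only [Function.iterate_zero, id] at hfx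
        have hget : pvGetP p (i : Int) = ((pvStepN p i : Nat) : Int) := (hInv.2.1 i hi).1
        have hgi : pvGetP p (i : Int) = (i : Int) := by rw [hget, hfx]
        refine ⟨p, ?_, hInv, fun x _ => rfl⟩
        show pvFind (fl + 1) p (i : Int) = _
        simp only [pvFind]
        rw [if_neg (by rw [hgi]; simp), hgi, pv_root_of_fix hfx]
  | succ m ih =>
      intro i fuel hi hfx hm
      match fuel, hm with
      | fl + 1, hm =>
        by_cases hfxx : pvFxN p i
        · have hget : pvGetP p (i : Int) = ((pvStepN p i : Nat) : Int) := (hInv.2.1 i hi).1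
          have hgi : pvGetP p (i : Int) = (i : Int) := by rw [hget, hfxx]
          refine ⟨p, ?_, hInv, fun x _ => rfl⟩
          show pvFind (fl + 1) p (i : Int) = _
          simp only [pvFind]
          rw [if_neg (by rw [hgi]; simp), hgi, pv_root_of_fix hfxx]
        · have hget : pvGetP p (i : Int) = ((pvStepN p i : Nat) : Int) := (hInv.2.1 i hi).1
          have hne : (i : Int) ≠ pvGetP p (i : Int) := by
            rw [hget]
            intro he
            exact hfxx (by exact_mod_cast he.symm)
          rw [Function.iterate_succ_apply] at hfx
          obtain ⟨p₁, hp₁eq, hInv₁, hroots₁⟩ :=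
            ih (pvStepN p i) fl ((hInv.2.1 i hi).2) hfx (by omega)
          have hrfix := pv_root_fix hInv hi
          have hvf₁ : pvFxN p₁ (pvRootN p i) := by
            have h3 := (pv_root_fix hInv₁ hi).1
            rwa [hroots₁ i hi] at h3
          obtain ⟨hInv₂, hroot₂⟩ := pv_set_spec hInv₁ hi hrfix.2 hvf₁
            (Or.inr (hroots₁ i hi).symm)
          have hstepeq : pvRootN p (pvStepN p i) = pvRootN p i := pv_root_step hInv hi
          refine ⟨pvSetP p₁ (i : Int) ((pvRootN p i : Nat) : Int), ?_, hInv₂, ?_⟩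
          · show pvFind (fl + 1) p (i : Int) = _
            simp only [pvFind]
            rw [if_pos hne, hget, hp₁eq, hstepeq]
            simp only
            rw [pv_getP_set hInv₁.1 hi]
            simp
          · intro x hx
            rw [hroot₂ x hx]
            by_cases hc : pvRootN p₁ x = pvRootN p₁ i
            · rw [if_pos hc]
              rw [hroots₁ x hx, hroots₁ i hi] at hc
              rw [hc]
            · rw [if_neg hc, hroots₁ x hx]

theorem pv_find128 {p : List Int} (hInv : pvInv p) {i : Nat} (hi : i < 128) :
    ∃ p', pvFind 128 p (i : Int) = (((pvRootN p i : Nat) : Int), p') ∧ pvInv p' ∧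
      ∀ x, x < 128 → pvRootN p' x = pvRootN p x := by
  obtain ⟨m, hm, hfx⟩ := pv_small hInv hi
  exact pv_find_spec hInv m i 128 hi hfx (by omega)

theorem pv_union_spec {p : List Int} (hInv : pvInv p) {a b : Nat} (ha : a < 128) (hb : b < 128) :
    pvInv (pvUnion p (a : Int) (b : Int)) ∧
      ∀ x, x < 128 → pvRootN (pvUnion p (a : Int) (b : Int)) x =
        if pvRootN p x = pvRootN p a then pvRootN p b else pvRootN p x := by
  obtain ⟨p₁, h1, hInv₁, hr₁⟩ := pv_find128 hInv ha
  obtain ⟨p₂, h2, hInv₂, hr₂⟩ := pv_find128 hInv₁ hb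
  have hr₂' : ∀ x, x < 128 → pvRootN p₂ x = pvRootN p x := by
    intro x hx
    rw [hr₂ x hx, hr₁ x hx]
  have hU : pvUnion p (a : Int) (b : Int) =
      (if ((pvRootN p a : Nat) : Int) ≠ ((pvRootN p₁ b : Nat) : Int) then
        pvSetP p₂ ((pvRootN p a : Nat) : Int) (pvGetP p₂ ((pvRootN p₁ b : Nat) : Int))
      else p₂) := by
    unfold pvUnion
    rw [h1]
    simp only
    rw [h2]
  rw [hU]
  by_cases hab : pvRootN p a = pvRootN p b
  · have hcond : ¬ (((pvRootN p a : Nat) : Int) ≠ ((pvRootN p₁ b : Nat) : Int)) := by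
      rw [hr₁ b hb, hab]
      simp
    rw [if_neg hcond]
    refine ⟨hInv₂, ?_⟩
    intro x hx
    by_cases hc : pvRootN p x = pvRootN p a
    · rw [if_pos hc, hr₂' x hx, hc, hab]
    · rw [if_neg hc, hr₂' x hx]
  · have hcond : ((pvRootN p a : Nat) : Int) ≠ ((pvRootN p₁ b : Nat) : Int) := by
      rw [hr₁ b hb]
      intro he
      exact hab (by exact_mod_cast he)
    rw [if_pos hcond]
    have hrb : pvRootN p₂ b = pvRootN p b := hr₂' b hb
    have hfxb : pvFxN p₂ (pvRootN p b) := by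
      have h3 := (pv_root_fix hInv₂ hb).1
      rwa [hrb] at h3
    have hgetb : pvGetP p₂ ((pvRootN p₁ b : Nat) : Int) = ((pvRootN p b : Nat) : Int) := by
      rw [hr₁ b hb]
      rw [(hInv₂.2.1 (pvRootN p b) (by rw [← hrb]; exact (pv_root_fix hInv₂ hb).2)).1, hfxb]
    rw [hgetb]
    have hfxa : pvFxN p₂ (pvRootN p a) := by
      have h3 := (pv_root_fix hInv₂ ha).1
      rwa [hr₂' a ha] at h3
    obtain ⟨hInv₃, hroot₃⟩ := pv_set_spec hInv₂ (pv_root_fix hInv ha).2 (pv_root_fix hInv hb).2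
      hfxb (Or.inl hfxa)
    refine ⟨hInv₃, ?_⟩
    intro x hx
    rw [hroot₃ x hx, hr₂' x hx, pv_root_of_fix hfxa]

def pvSound (d : PySem.Dict Char Char) (p : List Int) : Prop :=
  ∀ x y : Nat, x < 128 → y < 128 → pvRootN p x = pvRootN p y →
    pvER d (Char.ofNat x) (Char.ofNat y)

theorem pv_chr_toNat {n : Nat} (h : n < 128) : (Char.ofNat n).toNat = n := by
  unfold Char.ofNat
  split
  · rfl
  · next hv => exact absurd (by constructor <;> omega : n.isValidChar) hv

theorem pv_good_bounds {d : PySem.Dict Char Char} (hg : PvGood d) {x t : Char}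
    (h : d.get? x = some t) : x.toNat < 128 ∧ t.toNat < 128 := by
  exact hg.2 (x, t) (PySem.Dict.mem_items_of_get?_eq_some d h)

theorem pv_unions_ops {d : PySem.Dict Char Char} (hg : PvGood d) :
    ∀ fuel (ch : Char) (vis : PySem.Set Char) (p : List Int), pvInv p →
      pvInv (pvUnions fuel d ch vis p).2 ∧
      (∀ x y : Nat, x < 128 → y < 128 → pvRootN p x = pvRootN p y →
        pvRootN (pvUnions fuel d ch vis p).2 x = pvRootN (pvUnions fuel d ch vis p).2 y) ∧
      (pvSound d p → pvSound d (pvUnions fuel d ch vis p).2) := by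
  intro fuel
  induction fuel with
  | zero => intro ch vis p hInv; exact ⟨hInv, fun x y _ _ h => h, fun h => h⟩
  | succ fuel ih =>
      intro ch vis p hInv
      show pvInv (pvUnions (fuel + 1) d ch vis p).2 ∧ _
      rw [pvUnions]
      cases hgch : d.get? ch with
      | none => exact ⟨hInv, fun x y _ _ h => h, fun h => h⟩
      | some t =>
          dsimp only
          by_cases hvc : vis.contains ch
          · rw [if_pos hvc]
            exact ⟨hInv, fun x y _ _ h => h, fun h => h⟩
          · rw [if_neg hvc]
            obtain ⟨hcb, htb⟩ := pv_good_bounds hg hgch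
            obtain ⟨hInvU, hrootU⟩ := pv_union_spec hInv hcb htb
            obtain ⟨ih1, ih2, ih3⟩ := ih t (vis.add ch) (pvUnion p (ch.toNat : Int) (t.toNat : Int)) hInvU
            refine ⟨ih1, ?_, ?_⟩
            · intro x y hx hy hxy
              apply ih2 x y hx hy
              rw [hrootU x hx, hrootU y hy, hxy]
            · intro hsnd
              apply ih3
              intro x y hx hy hxy
              rw [hrootU x hx, hrootU y hy] at hxy
              have hER : pvER d (Char.ofNat ch.toNat) (Char.ofNat t.toNat) := by
                rw [Char.ofNat_toNat, Char.ofNat_toNat]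
                exact Relation.EqvGen.rel _ _ hgch
              by_cases hcx : pvRootN p x = pvRootN p ch.toNat <;>
                by_cases hcy : pvRootN p y = pvRootN p ch.toNat
              · rw [if_pos hcx, if_pos hcy] at hxy
                exact hsnd x y hx hy (hcx.trans hcy.symm)
              · rw [if_pos hcx, if_neg hcy] at hxy
                have h1 := hsnd x ch.toNat hx hcb hcx
                have h2 := hsnd t.toNat y htb hy hxy
                exact Relation.EqvGen.trans _ _ _ h1 (Relation.EqvGen.trans _ _ _ hER h2)
              · rw [if_neg hcx, if_pos hcy] at hxy
                have h1 := hsnd x t.toNat hx htb hxy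
                have h2 := hsnd ch.toNat y hcb hy hcy.symm
                exact Relation.EqvGen.trans _ _ _ h1
                  (Relation.EqvGen.trans _ _ _ (Relation.EqvGen.symm _ _ hER) h2)
              · rw [if_neg hcx, if_neg hcy] at hxy
                exact hsnd x y hx hy hxy

theorem pv_unions_first {d : PySem.Dict Char Char} (hg : PvGood d) {ch t : Char}
    (hedge : d.get? ch = some t) {fuel : Nat} {p : List Int} (hInv : pvInv p) :
    pvRootN (pvUnions (fuel + 1) d ch PySem.Set.empty p).2 ch.toNat =
      pvRootN (pvUnions (fuel + 1) d ch PySem.Set.empty p).2 t.toNat := by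
  obtain ⟨hcb, htb⟩ := pv_good_bounds hg hedge
  have hvc : (PySem.Set.empty : PySem.Set Char).contains ch = false := by
    cases hc : (PySem.Set.empty : PySem.Set Char).contains ch with
    | false => rfl
    | true =>
        have := (PySem.Set.contains_iff _ ch).mp hc
        simp [PySem.Set.empty] at this
  have hrw : (pvUnions (fuel + 1) d ch PySem.Set.empty p).2 =
      (pvUnions fuel d t (PySem.Set.add PySem.Set.empty ch)
        (pvUnion p (ch.toNat : Int) (t.toNat : Int))).2 := by
    rw [pvUnions, hedge, hvc]
    simp
  rw [hrw]
  obtain ⟨hInvU, hrootU⟩ := pv_union_spec hInv hcb htb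
  have hequ : pvRootN (pvUnion p (ch.toNat : Int) (t.toNat : Int)) ch.toNat =
      pvRootN (pvUnion p (ch.toNat : Int) (t.toNat : Int)) t.toNat := by
    rw [hrootU ch.toNat hcb, hrootU t.toNat htb, if_pos rfl]
    by_cases hc : pvRootN p t.toNat = pvRootN p ch.toNat
    · rw [if_pos hc]
    · rw [if_neg hc]
  exact (pv_unions_ops hg fuel t (PySem.Set.add PySem.Set.empty ch) _ hInvU).2.1
    ch.toNat t.toNat hcb htb hequ

theorem pv_fold_spec {d : PySem.Dict Char Char} (hg : PvGood d) :
    ∀ (ks : List Char) (p : List Int), pvInv p → pvSound d p →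
      pvInv (ks.foldl (fun p k => (pvUnions (d.keys.length + 1) d k PySem.Set.empty p).2) p) ∧
      pvSound d (ks.foldl (fun p k => (pvUnions (d.keys.length + 1) d k PySem.Set.empty p).2) p) ∧
      (∀ x y : Nat, x < 128 → y < 128 → pvRootN p x = pvRootN p y →
        pvRootN (ks.foldl (fun p k => (pvUnions (d.keys.length + 1) d k PySem.Set.empty p).2) p) x =
        pvRootN (ks.foldl (fun p k => (pvUnions (d.keys.length + 1) d k PySem.Set.empty p).2) p) y) ∧
      ∀ ch ∈ ks, ∀ t, d.get? ch = some t →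
        pvRootN (ks.foldl (fun p k => (pvUnions (d.keys.length + 1) d k PySem.Set.empty p).2) p) ch.toNat =
        pvRootN (ks.foldl (fun p k => (pvUnions (d.keys.length + 1) d k PySem.Set.empty p).2) p) t.toNat := by
  intro ks
  induction ks with
  | nil =>
      intro p hInv hsnd
      exact ⟨hInv, hsnd, fun x y _ _ h => h, by intro ch hch; simp at hch⟩
  | cons k ks ih =>
      intro p hInv hsnd
      simp only [List.foldl_cons]
      obtain ⟨hInvQ, hmonoQ, hsndQ⟩ :=
        pv_unions_ops hg (d.keys.length + 1) k PySem.Set.empty p hInv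
      obtain ⟨ih1, ih2, ih3, ih4⟩ := ih (pvUnions (d.keys.length + 1) d k PySem.Set.empty p).2
        hInvQ (hsndQ hsnd)
      refine ⟨ih1, ih2, ?_, ?_⟩
      · intro x y hx hy hxy
        exact ih3 x y hx hy (hmonoQ x y hx hy hxy)
      · intro ch hch t hedge
        rcases List.mem_cons.mp hch with hch | hch
        · subst hch
          obtain ⟨hcb, htb⟩ := pv_good_bounds hg hedge
          exact ih3 ch.toNat t.toNat hcb htb (pv_unions_first hg hedge hInv)
        · exact ih4 ch hch t hedge

theorem pv_p0_spec : pvInv (PySem.List.pyRange 0 128 1) ∧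
    ∀ i : Nat, i < 128 → pvRootN (PySem.List.pyRange 0 128 1) i = i := by
  have hlen : (PySem.List.pyRange 0 128 1).length = 128 := by
    rw [PySem.List.length_pyRange_one]; decide
  have hget : ∀ i : Nat, i < 128 → pvGetP (PySem.List.pyRange 0 128 1) (i : Int) = (i : Int) := by
    intro i hi
    unfold pvGetP
    rw [PySem.List.pyGet?_natCast, List.getElem?_eq_getElem (by rw [hlen]; exact hi),
      PySem.List.getElem_pyRange_one]
    simp
  have hfx : ∀ i : Nat, i < 128 → pvFxN (PySem.List.pyRange 0 128 1) i := by
    intro i hi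
    unfold pvFxN pvStepN
    rw [hget i hi]
    simp
  refine ⟨⟨hlen, ?_, ?_⟩, ?_⟩
  · intro i hi
    have h1 := hfx i hi
    unfold pvFxN at h1
    refine ⟨?_, by rw [h1]; exact hi⟩
    rw [hget i hi, h1]
  · intro i hi
    exact ⟨0, hfx i hi⟩
  · intro i hi
    exact pv_root_of_fix (hfx i hi)

theorem pv_ER_elim {d : PySem.Dict Char Char} (hg : PvGood d) {p1 : List Int}
    (hedges : ∀ ch ∈ d.keys, ∀ t, d.get? ch = some t →
      pvRootN p1 ch.toNat = pvRootN p1 t.toNat)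
    {x y : Char} (h : pvER d x y) :
    x = y ∨ (x.toNat < 128 ∧ y.toNat < 128 ∧ pvRootN p1 x.toNat = pvRootN p1 y.toNat) := by
  induction h with
  | rel a b hab =>
      obtain ⟨h1, h2⟩ := pv_good_bounds hg hab
      exact Or.inr ⟨h1, h2, hedges a (pv_mem_keys_of_get? hab) b hab⟩
  | refl a => exact Or.inl rfl
  | symm a b _ ihab =>
      rcases ihab with h | ⟨h1, h2, h3⟩
      · exact Or.inl h.symm
      · exact Or.inr ⟨h2, h1, h3.symm⟩
  | trans a b c _ _ ih1 ih2 =>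
      rcases ih1 with h | ⟨h1, h2, h3⟩
      · rw [h]; exact ih2
      · rcases ih2 with h' | ⟨h4, h5, h6⟩
        · rw [← h']; exact Or.inr ⟨h1, h2, h3⟩
        · exact Or.inr ⟨h1, h5, h3.trans h6⟩

theorem pv_root_iff_ER {d : PySem.Dict Char Char} (hg : PvGood d) {p1 : List Int}
    (hsound : pvSound d p1)
    (hedges : ∀ ch ∈ d.keys, ∀ t, d.get? ch = some t →
      pvRootN p1 ch.toNat = pvRootN p1 t.toNat)
    {x y : Char} (hx : x.toNat < 128) (hy : y.toNat < 128) :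
    pvRootN p1 x.toNat = pvRootN p1 y.toNat ↔ pvER d x y := by
  constructor
  · intro h
    have := hsound x.toNat y.toNat hx hy h
    rwa [Char.ofNat_toNat, Char.ofNat_toNat] at this
  · intro h
    rcases pv_ER_elim hg hedges h with h | ⟨_, _, h3⟩
    · rw [h]
    · exact h3

-- ---------- the groups loop ----------

theorem pv_groups_spec {d : PySem.Dict Char Char} (hg : PvGood d) {p1 : List Int} :
    ∀ (l : List Int) (s : PySem.Set Int) (p : List Int), pvInv p →
      (∀ x : Nat, x < 128 → pvRootN p x = pvRootN p1 x) → s.Nodup →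
      (∀ i ∈ l, 0 ≤ i ∧ i < 128) →
      (l.foldl (fun gp i =>
          if (PySem.Set.ofList d.keys).contains (Char.ofNat i.toNat) then
            let fr := pvFind 128 gp.2 i
            (PySem.Set.add gp.1 fr.1, fr.2)
          else gp) (s, p)).1.Nodup ∧
      ∀ r : Int, r ∈ (l.foldl (fun gp i =>
          if (PySem.Set.ofList d.keys).contains (Char.ofNat i.toNat) then
            let fr := pvFind 128 gp.2 i
            (PySem.Set.add gp.1 fr.1, fr.2)
          else gp) (s, p)).1 ↔
        (r ∈ s ∨ ∃ i ∈ l, (Char.ofNat i.toNat) ∈ d.keys ∧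
          r = ((pvRootN p1 i.toNat : Nat) : Int)) := by
  intro l
  induction l with
  | nil =>
      intro s p hInv hpres hsnd hbounds
      simp only [List.foldl_nil]
      refine ⟨hsnd, ?_⟩
      intro r
      simp
  | cons i l ih =>
      intro s p hInv hpres hsnd hbounds
      simp only [List.foldl_cons]
      obtain ⟨hi0, hi128⟩ := hbounds i List.mem_cons_self
      have hitn : i.toNat < 128 := by omega
      by_cases hc : (PySem.Set.ofList d.keys).contains (Char.ofNat i.toNat) = true
      · rw [if_pos hc]
        have hckeys : Char.ofNat i.toNat ∈ d.keys := by
          have := (PySem.Set.contains_iff _ _).mp hc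
          exact (PySem.Set.mem_ofList _ _).mp this
        have hi' : (i : Int) = ((i.toNat : Nat) : Int) := (Int.toNat_of_nonneg hi0).symm
        obtain ⟨p', heq, hInv', hpres'⟩ := pv_find128 hInv hitn
        have hfr : pvFind 128 p i = (((pvRootN p i.toNat : Nat) : Int), p') := by
          rw [hi']; exact heq
        rw [hfr]
        dsimp only
        have hroot1 : pvRootN p i.toNat = pvRootN p1 i.toNat := hpres i.toNat hitn
        obtain ⟨ihnd, ihmem⟩ := ih (PySem.Set.add s ((pvRootN p i.toNat : Nat) : Int)) p' hInv'
          (fun x hx => (hpres' x hx).trans (hpres x hx))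
          (PySem.Set.nodup_add s _ hsnd)
          (fun j hj => hbounds j (List.mem_cons_of_mem i hj))
        refine ⟨ihnd, ?_⟩
        intro r
        rw [ihmem r]
        constructor
        · rintro (hr | hr)
          · rcases (PySem.Set.mem_add s _ r).mp hr with hr | hr
            · exact Or.inl hr
            · exact Or.inr ⟨i, List.mem_cons_self, hckeys, by rw [hr, hroot1]⟩
          · obtain ⟨j, hj, hjk, hjr⟩ := hr
            exact Or.inr ⟨j, List.mem_cons_of_mem i hj, hjk, hjr⟩
        · rintro (hr | hr)
          · exact Or.inl ((PySem.Set.mem_add s _ r).mpr (Or.inl hr))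
          · obtain ⟨j, hj, hjk, hjr⟩ := hr
            rcases List.mem_cons.mp hj with hj | hj
            · subst hj
              exact Or.inl ((PySem.Set.mem_add s _ r).mpr (Or.inr (by rw [hjr, hroot1])))
            · exact Or.inr ⟨j, hj, hjk, hjr⟩
      · rw [if_neg hc]
        obtain ⟨ihnd, ihmem⟩ := ih s p hInv hpres hsnd
          (fun j hj => hbounds j (List.mem_cons_of_mem i hj))
        refine ⟨ihnd, ?_⟩
        intro r
        rw [ihmem r]
        constructor
        · rintro (hr | hr)
          · exact Or.inl hr
          · obtain ⟨j, hj, hjk, hjr⟩ := hr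
            exact Or.inr ⟨j, List.mem_cons_of_mem i hj, hjk, hjr⟩
        · rintro (hr | hr)
          · exact Or.inl hr
          · obtain ⟨j, hj, hjk, hjr⟩ := hr
            rcases List.mem_cons.mp hj with hj | hj
            · subst hj
              exact absurd ((PySem.Set.contains_iff _ _).mpr
                ((PySem.Set.mem_ofList _ _).mpr hjk)) hc
            · exact Or.inr ⟨j, hj, hjk, hjr⟩

-- ---------- the counting argument ----------

theorem pv_count_eq {d : PySem.Dict Char Char} (hg : PvGood d) {p1 : List Int} {g : PySem.Set Int}
    (hsound : pvSound d p1)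
    (hedges : ∀ ch ∈ d.keys, ∀ t, d.get? ch = some t →
      pvRootN p1 ch.toNat = pvRootN p1 t.toNat)
    (hInv1 : pvInv p1)
    (hgnd : g.Nodup)
    (hgmem : ∀ r : Int, r ∈ g ↔ ∃ ch ∈ d.keys, r = ((pvRootN p1 ch.toNat : Nat) : Int)) :
    g.countP (fun i => pvHasLoop (d.keys.length + 1) d (Char.ofNat i.toNat) PySem.Set.empty) =
    d.keys.countP (fun ch =>
      match pvCycleOf d ch with
      | some cyc => decide (ch = (PySem.List.min? cyc (fun x => x)).getD ch)
      | none => false) := by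
  classical
  have hnd : d.keys.Nodup := hg.1
  have hK1 : ∀ ch ∈ d.keys, ch.toNat < 128 := by
    intro ch hch
    cases hgc : d.get? ch with
    | none => exact absurd hch ((PySem.Dict.get?_eq_none_iff_not_mem_keys d ch).mp hgc)
    | some t => exact (pv_good_bounds hg hgc).1
  have hterm_root : ∀ ch ∈ d.keys,
      pvTerm d (Char.ofNat (pvRootN p1 ch.toNat)) = pvTerm d ch := by
    intro ch hch
    have hb := hK1 ch hch
    have hrb : pvRootN p1 ch.toNat < 128 := (pv_root_fix hInv1 hb).2
    have hcn : (Char.ofNat (pvRootN p1 ch.toNat)).toNat = pvRootN p1 ch.toNat :=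
      pv_chr_toNat hrb
    apply (pv_term_eq_iff_ER hnd _ _).mpr
    apply (pv_root_iff_ER hg hsound hedges (by rw [hcn]; exact hrb) hb).mp
    rw [hcn]
    exact pv_root_of_fix (pv_root_fix hInv1 hb).1
  have hloops_pred : ∀ ch ∈ d.keys,
      (pvHasLoop (d.keys.length + 1) d
          (Char.ofNat ((pvRootN p1 ch.toNat : Nat) : Int).toNat) PySem.Set.empty = true
        ↔ pvLoops d ch) := by
    intro ch hch
    have hcast : ((pvRootN p1 ch.toNat : Nat) : Int).toNat = pvRootN p1 ch.toNat := by simp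
    rw [hcast, pv_hasLoop_spec hnd, pv_loops_iff_term_mem hnd, pv_loops_iff_term_mem hnd,
      hterm_root ch hch]
  have hrootrw : ∀ ch ∈ d.keys, pvRootN p1 ((Char.ofNat (pvRootN p1 ch.toNat)).toNat) =
      pvRootN p1 ch.toNat := by
    intro ch hch
    have hb := hK1 ch hch
    have hrb : pvRootN p1 ch.toNat < 128 := (pv_root_fix hInv1 hb).2
    rw [pv_chr_toNat hrb]
    exact pv_root_of_fix (pv_root_fix hInv1 hb).1
  set lB : Char → Bool := fun k => (pvIter d (d.keys.length + 1) k).isSome with hlB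
  set S : Finset Char := (d.keys.filter (fun k => lB k)).toFinset with hS
  set fA : Char → Int := fun k => ((pvRootN p1 k.toNat : Nat) : Int) with hfA
  have hA : g.countP
        (fun i => pvHasLoop (d.keys.length + 1) d (Char.ofNat i.toNat) PySem.Set.empty)
      = (S.image fA).card := by
    rw [List.countP_eq_length_filter,
      ← List.toFinset_card_of_nodup (List.Nodup.filter _ hgnd)]
    congr 1
    apply Finset.ext
    intro r
    simp only [List.mem_toFinset, List.mem_filter, Finset.mem_image, hS]
    constructor
    · rintro ⟨hrg, hrpred⟩
      obtain ⟨ch, hch, hreq⟩ := (hgmem r).mp hrg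
      subst hreq
      exact ⟨ch, ⟨hch, (pv_loops_iff hnd ch).mp ((hloops_pred ch hch).mp hrpred)⟩, rfl⟩
    · rintro ⟨ch, ⟨hch, hchB⟩, hreq⟩
      subst hreq
      refine ⟨(hgmem _).mpr ⟨ch, hch, rfl⟩, ?_⟩
      exact (hloops_pred ch hch).mpr ((pv_loops_iff hnd ch).mpr hchB)
  have hmemS : ∀ ch, ch ∈ S ↔ ch ∈ d.keys ∧ pvLoops d ch := by
    intro ch
    rw [hS, List.mem_toFinset, List.mem_filter, hlB]
    constructor
    · rintro ⟨h1, h2⟩; exact ⟨h1, (pv_loops_iff hnd ch).mpr h2⟩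
    · rintro ⟨h1, h2⟩; exact ⟨h1, (pv_loops_iff hnd ch).mp h2⟩
  have himg : S.image (pvTerm d) =
      (S.image fA).image (fun r : Int => pvTerm d (Char.ofNat r.toNat)) := by
    rw [Finset.image_image]
    apply (Finset.image_congr ?_).symm
    intro ch hchS
    have hch := ((hmemS ch).mp hchS).1
    show pvTerm d (Char.ofNat ((fA ch)).toNat) = pvTerm d ch
    rw [hfA]
    simp only [Int.toNat_natCast]
    exact hterm_root ch hch
  have hinj : Set.InjOn (fun r : Int => pvTerm d (Char.ofNat r.toNat)) ↑(S.image fA) := by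
    intro r1 h1 r2 h2 heq
    obtain ⟨c1, hc1, hr1⟩ := Finset.mem_image.mp (Finset.mem_coe.mp h1)
    obtain ⟨c2, hc2, hr2⟩ := Finset.mem_image.mp (Finset.mem_coe.mp h2)
    have hk1 := ((hmemS c1).mp hc1).1
    have hk2 := ((hmemS c2).mp hc2).1
    subst hr1; subst hr2
    have heq' : pvTerm d c1 = pvTerm d c2 := by
      have e1 : pvTerm d (Char.ofNat ((fA c1)).toNat) = pvTerm d c1 := by
        rw [hfA]; simp only [Int.toNat_natCast]; exact hterm_root c1 hk1
      have e2 : pvTerm d (Char.ofNat ((fA c2)).toNat) = pvTerm d c2 := by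
        rw [hfA]; simp only [Int.toNat_natCast]; exact hterm_root c2 hk2
      rw [← e1, ← e2]
      exact heq
    have hroots : pvRootN p1 c1.toNat = pvRootN p1 c2.toNat :=
      (pv_root_iff_ER hg hsound hedges (hK1 c1 hk1) (hK1 c2 hk2)).mpr
        ((pv_term_eq_iff_ER hnd c1 c2).mp heq')
    rw [hfA]
    simp only [Int.natCast_inj]
    exact_mod_cast hroots
  have hcard2 : (S.image fA).card = (S.image (pvTerm d)).card := by
    rw [himg]
    exact (Finset.card_image_of_injOn hinj).symm
  have hfix : S.image (pvTerm d) = S.filter (fun k => pvTerm d k = k) := by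
    apply Finset.ext
    intro t
    simp only [Finset.mem_image, Finset.mem_filter]
    constructor
    · rintro ⟨ch, hchS, hcht⟩
      obtain ⟨hch, hl⟩ := (hmemS ch).mp hchS
      obtain ⟨hocy, hidem⟩ := pv_term_cyc hnd hl
      subst hcht
      refine ⟨(hmemS _).mpr ⟨?_, ?_⟩, hidem⟩
      · exact (pv_loops_iff_term_mem hnd ch).mp hl
      · exact pv_cyc_loops hocy
    · rintro ⟨htS, hterm⟩
      exact ⟨t, htS, hterm⟩
  have hB : d.keys.countP (fun ch =>
        match pvCycleOf d ch with
        | some cyc => decide (ch = (PySem.List.min? cyc (fun x => x)).getD ch)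
        | none => false)
      = (S.filter (fun k => pvTerm d k = k)).card := by
    rw [List.countP_eq_length_filter,
      ← List.toFinset_card_of_nodup (List.Nodup.filter _ hnd)]
    congr 1
    apply Finset.ext
    intro ch
    simp only [List.mem_toFinset, List.mem_filter, Finset.mem_filter]
    constructor
    · rintro ⟨hch, hpred⟩
      rw [pv_predB_iff hnd ch] at hpred
      have h1 : (pvIter d (d.keys.length + 1) ch).isSome := by
        cases hi : (pvIter d (d.keys.length + 1) ch).isSome with
        | true => rfl
        | false => rw [hi] at hpred; simp at hpred
      have h2 : pvTerm d ch = ch := by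
        rw [h1] at hpred
        simpa using hpred
      exact ⟨(hmemS ch).mpr ⟨hch, (pv_loops_iff hnd ch).mpr h1⟩, h2⟩
    · rintro ⟨hchS, hterm⟩
      obtain ⟨hch, hl⟩ := (hmemS ch).mp hchS
      refine ⟨hch, ?_⟩
      rw [pv_predB_iff hnd ch]
      have h1 : (pvIter d (d.keys.length + 1) ch).isSome := (pv_loops_iff hnd ch).mp hl
      rw [h1]
      simpa using hterm
  rw [hA, hcard2, hfix, hB]

-- ---------- assembling the two phase-2 computations ----------

theorem pv_loop_eq (d : PySem.Dict Char Char) (hg : PvGood d) :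
    (let p0 : List Int := PySem.List.pyRange 0 128 1
     let p1 : List Int :=
       d.keys.foldl (fun p k => (pvUnions (d.keys.length + 1) d k PySem.Set.empty p).2) p0
     let keySet : PySem.Set Char := PySem.Set.ofList d.keys
     let gp : PySem.Set Int × List Int :=
       (PySem.List.pyRange 0 128 1).foldl
         (fun gp i =>
           if keySet.contains (Char.ofNat i.toNat) then
             let fr := pvFind 128 gp.2 i
             (PySem.Set.add gp.1 fr.1, fr.2)
           else gp)
         (PySem.Set.empty, p1)
     let loop : Int :=
       gp.1.foldl
         (fun acc i =>
           if pvHasLoop (d.keys.length + 1) d (Char.ofNat i.toNat) PySem.Set.empty then acc + 1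
           else acc)
         0
     loop) =
    (d.keys.foldl
      (fun acc ch =>
        match pvCycleOf d ch with
        | some cyc => if ch = (PySem.List.min? cyc (fun x => x)).getD ch then acc + 1 else acc
        | none => acc)
      0 : Int) := by
  dsimp only
  have hnd : d.keys.Nodup := hg.1
  have hK1 : ∀ ch ∈ d.keys, ch.toNat < 128 := by
    intro ch hch
    cases hgc : d.get? ch with
    | none => exact absurd hch ((PySem.Dict.get?_eq_none_iff_not_mem_keys d ch).mp hgc)
    | some t => exact (pv_good_bounds hg hgc).1
  obtain ⟨hInv0, hroot0⟩ := pv_p0_spec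
  have hsnd0 : pvSound d (PySem.List.pyRange 0 128 1) := by
    intro x y hx hy hxy
    rw [hroot0 x hx, hroot0 y hy] at hxy
    rw [hxy]
    exact Relation.EqvGen.refl _
  obtain ⟨hInv1, hsnd1, hmono1, hedges1⟩ :=
    pv_fold_spec hg d.keys (PySem.List.pyRange 0 128 1) hInv0 hsnd0
  set p1 := d.keys.foldl
    (fun p k => (pvUnions (d.keys.length + 1) d k PySem.Set.empty p).2)
    (PySem.List.pyRange 0 128 1) with hp1
  have hedges1' : ∀ ch ∈ d.keys, ∀ t, d.get? ch = some t →
      pvRootN p1 ch.toNat = pvRootN p1 t.toNat := hedges1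
  obtain ⟨hgnd, hgmem⟩ := pv_groups_spec hg (p1 := p1) (PySem.List.pyRange 0 128 1)
    PySem.Set.empty p1 hInv1 (fun x _ => rfl)
    (by simp [PySem.Set.empty])
    (by
      intro i hi
      have := PySem.List.mem_pyRange_one.mp hi
      omega)
  set gp := (PySem.List.pyRange 0 128 1).foldl
    (fun gp i =>
      if (PySem.Set.ofList d.keys).contains (Char.ofNat i.toNat) then
        let fr := pvFind 128 gp.2 i
        (PySem.Set.add gp.1 fr.1, fr.2)
      else gp)
    (PySem.Set.empty, p1) with hgp
  have hgmem' : ∀ r : Int, r ∈ gp.1 ↔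
      ∃ ch ∈ d.keys, r = ((pvRootN p1 ch.toNat : Nat) : Int) := by
    intro r
    rw [hgmem r]
    constructor
    · rintro (hr | ⟨i, hi, hik, hir⟩)
      · simp [PySem.Set.empty] at hr
      · obtain ⟨hi0, hi128⟩ := PySem.List.mem_pyRange_one.mp hi
        refine ⟨Char.ofNat i.toNat, hik, ?_⟩
        rw [pv_chr_toNat (by omega)]
        exact hir
    · rintro ⟨ch, hch, hr⟩
      refine Or.inr ⟨(ch.toNat : Int), ?_, ?_, ?_⟩
      · rw [PySem.List.mem_pyRange_one]
        have := hK1 ch hch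
        omega
      · rw [Int.toNat_natCast, Char.ofNat_toNat]
        exact hch
      · rw [Int.toNat_natCast]
        exact hr
  rw [PySem.List.foldl_count_if
    (fun i => pvHasLoop (d.keys.length + 1) d (Char.ofNat i.toNat) PySem.Set.empty) gp.1 0]
  have hBfold : d.keys.foldl
      (fun acc ch =>
        match pvCycleOf d ch with
        | some cyc => if ch = (PySem.List.min? cyc (fun x => x)).getD ch then acc + 1 else acc
        | none => acc)
      (0 : Int) =
    d.keys.foldl
      (fun acc ch =>
        if (match pvCycleOf d ch with
          | some cyc => decide (ch = (PySem.List.min? cyc (fun x => x)).getD ch)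
          | none => false) = true then acc + 1 else acc)
      (0 : Int) := by
    congr 1
    funext acc ch
    cases hcy : pvCycleOf d ch with
    | none => simp
    | some cyc =>
        dsimp only
        simp only [decide_eq_true_eq]
  rw [hBfold, PySem.List.foldl_count_if]
  have := pv_count_eq hg hsnd1 hedges1' hInv1 hgnd hgmem'
  rw [this]

-- ===== VERDICT (by name: the statement is the Claim_ definition above) =====
theorem mini_char_transfer_spec : Claim_equal_mini_char_transfer := by
  intro source target hdom _hpre
  unfold Spec_mini_char_transfer mini_char_transfer mini_char_transfer_alt
  rw [pvBuild_eq]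
  cases h : pvBuildA source.toList target.toList with
  | err => rfl
  | ret v => rfl
  | run d res =>
      have hdom' : pvDomStr source = true ∧ pvDomStr target = true := by
        have := hdom; unfold Dom_mini_char_transfer at this; simpa using this
      have hg : PvGood d := by
        apply pv_build_good source.toList target.toList _ _ h
        · intro c hc; have := hdom'.1; unfold pvDomStr at this; simpa using List.all_eq_true.mp this c hc
        · intro c hc; have := hdom'.2; unfold pvDomStr at this; simpa using List.all_eq_true.mp this c hc
      have := pv_loop_eq d hg
      simp only at this ⊢
      omega
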